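-- pv_equiv track=rewrite | github.com/alexjst/algorithms | Python/companies/Faire/07_course_schedule_min_time_solution.py | min_time_to_complete_courses
-- ===== SOURCE A (Python) =====
-- from typing import List
-- from collections import defaultdict, deque
--
-- def min_time_to_complete_courses(n: int, prerequisites: List[List[int]], time: List[int]) -> int:
--     """
--     Find minimum time to complete all courses.
--
--     Args:
--         n: Number of courses (0 to n-1)
--         prerequisites: List of [course, prerequisite] pairs
--                       [a, b] means course b must be completed before course a
--         time: List where time[i] is duration of course i
--
--     Returns:
--         Minimum time to complete all courses (can take multiple in parallel)
--
--     Examples: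
--         >>> min_time_to_complete_courses(3, [[1,0], [2,0]], [1, 2, 3])
--         4  # Course 0 (1 day), then courses 1 and 2 in parallel (max 3 days) = 4 total
--
--         >>> min_time_to_complete_courses(4, [[1,0], [2,1], [3,2]], [1, 1, 1, 1])
--         4  # Must be sequential: 0->1->2->3 = 4 days
--
--     Key Insight:
--     - Courses can run in PARALLEL if no dependency
--     - Course i can start at: max(end_time of all prerequisites)
--     - Total time = max(end_time of all courses)
--
--     Time: O(V + E) where V = courses, E = prerequisites
--     Space: O(V + E) for adjacency list and in-degree tracking
--     """
--     # Build adjacency list (prerequisite -> courses that depend on it)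
--     graph = defaultdict(list)  # prereq -> [courses that need it]
--     in_degree = [0] * n  # Count of prerequisites for each course
--
--     for course, prereq in prerequisites:
--         graph[prereq].append(course)
--         in_degree[course] += 1
--
--     # Track earliest start time for each course
--     earliest_start = [0] * n  # When course can start
--     earliest_end = [0] * n    # When course will end
--
--     # BFS: Start with courses that have no prerequisites
--     queue = deque()
--     for i in range(n):
--         if in_degree[i] == 0:
--             queue.append(i)
--             earliest_end[i] = time[i]  # Can start immediately, ends at time[i]
--
--     # Process courses in topological order
--     while queue:
--         prereq = queue.popleft()
--
--         # For each course that depends on this prerequisite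
--         for course in graph[prereq]:
--             # Course can start when this prerequisite finishes
--             earliest_start[course] = max(earliest_start[course], earliest_end[prereq])
--
--             # Decrease in-degree
--             in_degree[course] -= 1
--
--             # If all prerequisites done, this course can now start
--             if in_degree[course] == 0:
--                 earliest_end[course] = earliest_start[course] + time[course]
--                 queue.append(course)
--
--     # Total time = when the last course finishes
--     return max(earliest_end)
-- ===== SOURCE B (Python) =====
-- def min_time_to_complete_courses(n, prerequisites, time):
--     # Reverse view: for each course, the list of its prerequisites.
--     prereqs = {i: [] for i in range(n)}
--     for course, prereq in prerequisites:
--         prereqs[course].append(prereq)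
--
--     # Chaotic iteration to the fixpoint: a course's finish time becomes
--     # known once all its prerequisites' finish times are known.
--     finish = {}
--     changed = True
--     while changed:
--         changed = False
--         for i in range(n):
--             if i not in finish and all(p in finish for p in prereqs[i]):
--                 best = 0
--                 for p in prereqs[i]:
--                     if finish[p] > best:
--                         best = finish[p]
--                 finish[i] = best + time[i]
--                 changed = True
--     # Courses stuck in a dependency cycle never finish; they count as 0.
--     return max(finish.get(i, 0) for i in range(n))
-- ===== Notes on version B (the rewrite author's own statement) =====
-- stated objective: alternative
-- what changed: Replaces Kahn's queue-based topological BFS (in-degree counters, earliest_start/earliest_end arrays, deque) by a chaotic-iteration fixpoint over a reverse map course->prerequisites: repeatedly sweep the courses, finalizing a course's finish time once all its prerequisites are finalized, until a sweep changes nothing; courses stuck on a cycle never finalize and count as 0, exactly as A leaves them.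
-- outside the precondition, e.g. on min_time_to_complete_courses(2, [[-1, 0]], [3, 4]): A returns 7, B raises KeyError; on min_time_to_complete_courses(2, [[1, 0], [0, 1]], [5]): A returns 0, B returns 0; on min_time_to_complete_courses(0, [], []): A raises ValueError, B raises ValueError
import Mathlib
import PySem

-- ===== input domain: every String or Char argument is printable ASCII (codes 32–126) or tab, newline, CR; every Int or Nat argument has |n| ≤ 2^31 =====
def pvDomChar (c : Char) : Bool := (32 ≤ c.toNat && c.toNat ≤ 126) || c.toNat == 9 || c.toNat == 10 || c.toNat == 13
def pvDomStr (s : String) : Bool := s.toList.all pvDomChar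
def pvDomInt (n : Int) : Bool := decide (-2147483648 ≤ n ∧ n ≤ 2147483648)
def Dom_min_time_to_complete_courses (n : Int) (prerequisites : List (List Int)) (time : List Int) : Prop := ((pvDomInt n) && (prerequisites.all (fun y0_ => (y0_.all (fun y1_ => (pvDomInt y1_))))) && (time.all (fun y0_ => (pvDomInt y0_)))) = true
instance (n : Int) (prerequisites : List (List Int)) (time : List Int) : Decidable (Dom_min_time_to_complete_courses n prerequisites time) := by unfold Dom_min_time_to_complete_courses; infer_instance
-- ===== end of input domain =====

-- B replaces A's queue-based topological BFS (Kahn) by a chaotic-iteration fixpoint over a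
-- reverse course->prerequisites map: sweep the courses until a sweep finalizes nothing new;
-- cycle-stuck courses never finalize and count as 0, exactly as A leaves them. Objective: alternative.


-- ===== PORT A =====
-- inner 'for course in graph[prereq]' body of A; state (queue, in_degree, earliest_start, earliest_end)
def pvA_relax (timeL : List Int) (prereq : Int)
    (st : List Int × List Int × List Int × List Int) (course : Int) :
    List Int × List Int × List Int × List Int :=
  let q := st.1; let indeg := st.2.1; let es := st.2.2.1; let ee := st.2.2.2
  let es := PySem.List.pySetD es course (max (PySem.List.pyGetD es course 0) (PySem.List.pyGetD ee prereq 0))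
  let indeg := PySem.List.pySetD indeg course (PySem.List.pyGetD indeg course 0 - 1)
  if PySem.List.pyGetD indeg course 0 == 0 then
    let ee := PySem.List.pySetD ee course (PySem.List.pyGetD es course 0 + PySem.List.pyGetD timeL course 0)
    (q ++ [course], indeg, es, ee)
  else (q, indeg, es, ee)

-- A's 'while queue' loop; fuel only makes it total (one unit per pop, n+1 pops never happen)
def pvA_loop (graph : PySem.Dict Int (List Int)) (timeL : List Int) :
    Nat → List Int → List Int × List Int × List Int → List Int
  | 0, _, st => st.2.2
  | _ + 1, [], st => st.2.2
  | fuel + 1, prereq :: rest, st =>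
      let st' := (graph.getD prereq []).foldl (pvA_relax timeL prereq) (rest, st)
      pvA_loop graph timeL fuel st'.1 st'.2

def min_time_to_complete_courses (n : Int) (prerequisites : List (List Int)) (time : List Int) : Int :=
  let gi := prerequisites.foldl
    (fun (st : PySem.Dict Int (List Int) × List Int) pair =>
      match pair with
      | course :: prereq :: _ =>
          (st.1.modify prereq [] (· ++ [course]),
           PySem.List.pySetD st.2 course (PySem.List.pyGetD st.2 course 0 + 1))
      | _ => st)  -- Python raises on a pair of length < 2; outside Pre_
    (PySem.Dict.empty, List.replicate n.toNat 0)
  let graph := gi.1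
  let indeg := gi.2
  let es : List Int := List.replicate n.toNat 0
  let qe := (PySem.List.pyRange 0 n 1).foldl
    (fun (st : List Int × List Int) i =>
      if PySem.List.pyGetD indeg i 0 == 0 then
        (st.1 ++ [i], PySem.List.pySetD st.2 i (PySem.List.pyGetD time i 0))
      else st) ([], List.replicate n.toNat 0)
  let eeFin := pvA_loop graph time (n.toNat + 1) qe.1 (indeg, es, qe.2)
  (PySem.List.max? eeFin (fun y => y)).getD 0  -- Python max([]) raises; outside Pre_

-- ===== PORT B =====
-- one 'for i in range(n)' sweep of B; state (finish, changed)
def pvB_round (n : Int) (prereqs : PySem.Dict Int (List Int)) (timeL : List Int)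
    (f0 : PySem.Dict Int Int) : PySem.Dict Int Int × Bool :=
  (PySem.List.pyRange 0 n 1).foldl
    (fun (st : PySem.Dict Int Int × Bool) i =>
      let finish := st.1
      if finish.contains i then st
      else if (prereqs.getD i []).all (fun p => finish.contains p) then
        let best := (prereqs.getD i []).foldl
          (fun b p => if finish.getD p 0 > b then finish.getD p 0 else b) 0
        (finish.insert i (best + PySem.List.pyGetD timeL i 0), true)
      else st) (f0, false)

-- B's 'while changed' loop; fuel only makes it total (a sweep past the n-th changes nothing)
def pvB_loop (n : Int) (prereqs : PySem.Dict Int (List Int)) (timeL : List Int) :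
    Nat → PySem.Dict Int Int → PySem.Dict Int Int
  | 0, f => f
  | fuel + 1, f =>
      let r := pvB_round n prereqs timeL f
      if r.2 then pvB_loop n prereqs timeL fuel r.1 else r.1

def min_time_to_complete_courses_alt (n : Int) (prerequisites : List (List Int)) (time : List Int) : Int :=
  let pr0 := (PySem.List.pyRange 0 n 1).foldl
    (fun (d : PySem.Dict Int (List Int)) i => d.insert i []) PySem.Dict.empty
  let prereqs := prerequisites.foldl
    (fun (d : PySem.Dict Int (List Int)) pair =>
      d.insert (pair.getD 0 0) (d.getD (pair.getD 0 0) [] ++ [pair.getD 1 0]))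
    pr0  -- Python's 'for course, prereq in …' raises on a pair of length ≠ 2; outside Pre_
  let finish := pvB_loop n prereqs time (n.toNat + 2) PySem.Dict.empty
  (PySem.List.max? ((PySem.List.pyRange 0 n 1).map (fun i => finish.getD i 0)) (fun y => y)).getD 0

-- ===== PRECONDITION & SPEC =====
-- Pre_ keeps the task's natural domain: at least one course (A's max() raises on n ≤ 0), a duration
-- for every course (A raises IndexError when time is shorter than n, except when a cycle hides the
-- access — there both return the same value), and each pair [course, prereq] with course a real
-- course id in [0, n) (Python's negative-index wraparound in A's in_degree list is an accident
-- there, and B naturally raises KeyError on such pairs; prereq may be any int — both treat an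
-- unknown prerequisite as never satisfied).
def Pre_min_time_to_complete_courses (n : Int) (prerequisites : List (List Int)) (time : List Int) : Prop :=
  1 ≤ n ∧ n ≤ (time.length : Int) ∧
    ∀ l ∈ prerequisites, l.length = 2 ∧ 0 ≤ l.getD 0 0 ∧ l.getD 0 0 < n
instance (n : Int) (prerequisites : List (List Int)) (time : List Int) : Decidable (Pre_min_time_to_complete_courses n prerequisites time) := by unfold Pre_min_time_to_complete_courses; infer_instance

def pvWitness_min_time_to_complete_courses : Int × List (List Int) × List Int := (3, [[1,0],[2,0]], [1,2,3])

def Spec_min_time_to_complete_courses (n : Int) (prerequisites : List (List Int)) (time : List Int) (out : Int) : Prop := out = min_time_to_complete_courses_alt n prerequisites time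
instance (n : Int) (prerequisites : List (List Int)) (time : List Int) (out : Int) : Decidable (Spec_min_time_to_complete_courses n prerequisites time out) := by unfold Spec_min_time_to_complete_courses; infer_instance

-- ===== CLAIM (what is proved, stated in full; the proofs are below) =====
def Claim_equal_min_time_to_complete_courses : Prop := ∀ (n : Int) (prerequisites : List (List Int)) (time : List Int), Dom_min_time_to_complete_courses n prerequisites time → Pre_min_time_to_complete_courses n prerequisites time → Spec_min_time_to_complete_courses n prerequisites time (min_time_to_complete_courses n prerequisites time)

-- ===== LEMMAS AND PROOFS =====

-- The common mathematical yardstick: the edge list (course, prereq), the prerequisite and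
-- dependent lists of a node, completability in k rounds (pvD) and the k-round finish value (pvV).
def pvEdges (prerequisites : List (List Int)) : List (Int × Int) :=
  prerequisites.map (fun l => ((l.getD 0 0 : Int), (l.getD 1 0 : Int)))

def pvPrq (E : List (Int × Int)) (i : Int) : List Int := (E.filter (fun e => e.1 == i)).map (·.2)
def pvGrf (E : List (Int × Int)) (p : Int) : List Int := (E.filter (fun e => e.2 == p)).map (·.1)

def pvD (n : Int) (E : List (Int × Int)) : Nat → Int → Bool
  | 0, _ => false
  | k + 1, i => decide (0 ≤ i) && decide (i < n) && (pvPrq E i).all (fun p => pvD n E k p)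

def pvV (E : List (Int × Int)) (t : List Int) : Nat → Int → Int
  | 0, _ => 0
  | k + 1, i => PySem.List.pyGetD t i 0 + (pvPrq E i).foldl (fun b p => max b (pvV E t k p)) 0

def pvComp (n : Int) (E : List (Int × Int)) (i : Int) : Prop := ∃ k, pvD n E k i = true

-- "v is the finish value A and B agree to give node i" (cycle-stuck nodes get 0)
def pvOut (n : Int) (E : List (Int × Int)) (t : List Int) (i v : Int) : Prop :=
  (∃ k, pvD n E k i = true ∧ v = pvV E t k i) ∨ (¬ pvComp n E i ∧ v = 0)

-- remaining in-degree of i once the nodes of P are popped (per-edge multiset count)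
def pvNdeg (E : List (Int × Int)) (P : List Int) (i : Int) : Int :=
  (((pvPrq E i).countP (fun p => !decide (p ∈ P))) : Int)

-- the earliest_start accumulated for i after relaxing, in order, the popped nodes P (values w)
def pvEsF (E : List (Int × Int)) (w : Int → Int) (i : Int) (P : List Int) : Int :=
  P.foldl (fun b p => if p ∈ pvPrq E i then max b (w p) else b) 0

theorem pvD_succ (n : Int) (E : List (Int × Int)) (k : Nat) (i : Int) :
    pvD n E (k + 1) i = (decide (0 ≤ i) && decide (i < n) && (pvPrq E i).all (fun p => pvD n E k p)) := rfl

theorem pvV_succ (E : List (Int × Int)) (t : List Int) (k : Nat) (i : Int) :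
    pvV E t (k + 1) i = PySem.List.pyGetD t i 0 + (pvPrq E i).foldl (fun b p => max b (pvV E t k p)) 0 := rfl

theorem pvD_mono {n E k i} (h : pvD n E k i = true) : pvD n E (k + 1) i = true := by
  induction k generalizing i with
  | zero => simp [pvD] at h
  | succ k ih =>
      rw [pvD_succ] at h ⊢
      simp only [Bool.and_eq_true, List.all_eq_true, decide_eq_true_eq] at h ⊢
      exact ⟨h.1, fun p hp => ih (h.2 p hp)⟩

theorem pvD_le {n E k m i} (hk : k ≤ m) (h : pvD n E k i = true) : pvD n E m i = true := by
  induction m with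
  | zero => exact (Nat.le_zero.1 hk) ▸ h
  | succ m ih =>
      rcases Nat.lt_or_ge k (m+1) with hlt | hge
      · exact pvD_mono (ih (by omega))
      · have : k = m + 1 := by omega
        exact this ▸ h

theorem pvV_stab {n E t k i} (h : pvD n E k i = true) : ∀ m, k ≤ m → pvV E t m i = pvV E t k i := by
  induction k generalizing i with
  | zero => simp [pvD] at h
  | succ k ih =>
      intro m hm
      obtain ⟨m', rfl⟩ : ∃ m', m = m' + 1 := ⟨m - 1, by omega⟩
      rw [pvD_succ] at h
      simp only [Bool.and_eq_true, List.all_eq_true, decide_eq_true_eq] at h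
      rw [pvV_succ, pvV_succ]
      congr 1
      refine PySem.List.foldl_congr_mem _ _ _ _ (fun b p hp => ?_)
      rw [ih (h.2 p hp) m' (by omega)]

theorem pvOut_unique {n E t i v w} (hv : pvOut n E t i v) (hw : pvOut n E t i w) : v = w := by
  rcases hv with ⟨k1, hd1, rfl⟩ | ⟨hc, rfl⟩
  · rcases hw with ⟨k2, hd2, rfl⟩ | ⟨hc, _⟩
    · rcases Nat.le_total k1 k2 with h | h
      · rw [← pvV_stab hd1 k2 h]
      · rw [← pvV_stab hd2 k1 h]
    · exact absurd ⟨k1, hd1⟩ hc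
  · rcases hw with ⟨k2, hd2, rfl⟩ | ⟨_, rfl⟩
    · exact absurd ⟨k2, hd2⟩ hc
    · rfl

theorem pvD_common {n E} (l : List Int) (h : ∀ p ∈ l, ∃ k, pvD n E k p = true) :
    ∃ K, ∀ p ∈ l, pvD n E K p = true := by
  induction l with
  | nil => exact ⟨0, by simp⟩
  | cons a l ih =>
      obtain ⟨K, hK⟩ := ih (fun p hp => h p (List.mem_cons_of_mem _ hp))
      obtain ⟨k, hk⟩ := h a List.mem_cons_self
      refine ⟨max k K, fun p hp => ?_⟩
      rcases List.mem_cons.1 hp with rfl | hp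
      · exact pvD_le (Nat.le_max_left _ _) hk
      · exact pvD_le (Nat.le_max_right _ _) (hK p hp)

theorem pvD_closure {n E} (S : Int → Prop)
    (hS : ∀ i, 0 ≤ i → i < n → (∀ p ∈ pvPrq E i, S p) → S i) :
    ∀ k i, pvD n E k i = true → S i := by
  intro k
  induction k with
  | zero => intro i h; simp [pvD] at h
  | succ k ih =>
      intro i h
      rw [pvD_succ] at h
      simp only [Bool.and_eq_true, List.all_eq_true, decide_eq_true_eq] at h
      exact hS i h.1.1 h.1.2 (fun p hp => ih p (h.2 p hp))

theorem pvV_agree {n E t k1 k2 i} (h1 : pvD n E k1 i = true) (h2 : pvD n E k2 i = true) :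
    pvV E t k1 i = pvV E t k2 i := by
  rcases Nat.le_total k1 k2 with h | h
  · rw [pvV_stab h1 k2 h]
  · rw [pvV_stab h2 k1 h]

theorem pvCountSplit (q : Int) (f : Int → Bool) (hfq : f q = true) (l : List Int) :
    l.countP (fun p => f p && !(p == q)) + l.count q = l.countP f := by
  induction l with
  | nil => rfl
  | cons x l ih =>
      rw [List.countP_cons, List.countP_cons, List.count_cons]
      by_cases hxq : x = q
      · subst hxq; simp [hfq]; omega
      · have hb : (x == q) = false := beq_eq_false_iff_ne.2 hxq
        simp [hb]
        omega

theorem pvFilterPop (P : List Int) (q : Int) (hq : q ∉ P) (l : List Int) :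
    l.countP (fun p => !decide (p ∈ P ++ [q])) + l.count q = l.countP (fun p => !decide (p ∈ P)) := by
  have h1 : l.countP (fun p => !decide (p ∈ P ++ [q]))
      = l.countP (fun p => (!decide (p ∈ P)) && !(p == q)) := by
    refine List.countP_congr (fun x _ => ?_)
    by_cases hP : x ∈ P <;> by_cases hx : x = q <;> simp [hP, hx, List.mem_append]
  rw [h1, pvCountSplit q _ (by simp [hq])]

theorem pvCountGrf (p c : Int) (E : List (Int × Int)) :
    (pvGrf E p).count c = (pvPrq E c).count p := by
  unfold pvGrf pvPrq
  rw [List.count_eq_countP, List.count_eq_countP, List.countP_map, List.countP_map,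
      List.countP_filter, List.countP_filter]
  exact List.countP_congr (fun e _ => by by_cases h1 : e.1 = c <;> by_cases h2 : e.2 = p <;> simp [h1, h2])

theorem pvMemGrf (E : List (Int × Int)) (p c : Int) :
    c ∈ pvGrf E p ↔ p ∈ pvPrq E c := by
  rw [← List.count_pos_iff, ← List.count_pos_iff, pvCountGrf]

theorem pvGS (a : List Int) (c i v : Int) (hc0 : 0 ≤ c)
    (hi0 : 0 ≤ i) (hil : i < (a.length : Int)) :
    PySem.List.pyGetD (PySem.List.pySetD a c v) i 0 = if i = c then v else PySem.List.pyGetD a i 0 := by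
  rw [PySem.List.pySetD_of_nonneg a v hc0,
      PySem.List.pyGetD_eq_getElem _ 0 hi0 (by simpa using hil),
      List.getElem_set]
  by_cases h : i = c
  · rw [if_pos (by omega), if_pos h]
  · rw [if_neg (by omega), if_neg h, PySem.List.pyGetD_eq_getElem _ 0 hi0 hil]

theorem pvGetRepl (N : Nat) (i : Int) (h0 : 0 ≤ i) (h1 : i < (N : Int)) :
    PySem.List.pyGetD (List.replicate N (0 : Int)) i 0 = 0 := by
  rw [PySem.List.pyGetD_eq_getElem _ 0 h0 (by simpa using h1)]
  simp

theorem pvMax_ge (w : Int → Int) (cond : Int → Prop) [DecidablePred cond] (P : List Int) (a : Int) :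
    a ≤ P.foldl (fun b p => if cond p then max b (w p) else b) a := by
  induction P generalizing a with
  | nil => simp
  | cons x P ih =>
      simp only [List.foldl_cons]
      by_cases h : cond x
      · rw [if_pos h]; exact le_trans (le_max_left _ _) (ih _)
      · rw [if_neg h]; exact ih _

theorem pvMax_ub (w : Int → Int) (cond : Int → Prop) [DecidablePred cond] (P : List Int) (a : Int) :
    ∀ p ∈ P, cond p → w p ≤ P.foldl (fun b p => if cond p then max b (w p) else b) a := by
  induction P generalizing a with
  | nil => simp
  | cons x P ih =>
      intro p hp hc
      simp only [List.foldl_cons]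
      rcases List.mem_cons.1 hp with rfl | hp
      · rw [if_pos hc]; exact le_trans (le_max_right _ _) (pvMax_ge _ _ _ _)
      · by_cases h : cond x
        · rw [if_pos h]; exact ih _ p hp hc
        · rw [if_neg h]; exact ih _ p hp hc

theorem pvMax_mem (w : Int → Int) (cond : Int → Prop) [DecidablePred cond] (P : List Int) (a : Int) :
    P.foldl (fun b p => if cond p then max b (w p) else b) a = a
      ∨ ∃ p ∈ P, cond p ∧ P.foldl (fun b p => if cond p then max b (w p) else b) a = w p := by
  induction P generalizing a with
  | nil => left; rfl
  | cons x P ih =>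
      simp only [List.foldl_cons]
      by_cases h : cond x
      · rw [if_pos h]
        rcases ih (max a (w x)) with he | ⟨p, hp, hc, he⟩
        · rcases max_choice a (w x) with hm | hm
          · left; rw [he, hm]
          · right; exact ⟨x, List.mem_cons_self, h, by rw [he, hm]⟩
        · right; exact ⟨p, List.mem_cons_of_mem _ hp, hc, he⟩
      · rw [if_neg h]
        rcases ih a with he | ⟨p, hp, hc, he⟩
        · left; exact he
        · right; exact ⟨p, List.mem_cons_of_mem _ hp, hc, he⟩

theorem pvMaxU_mem (w : Int → Int) (P : List Int) (a : Int) :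
    P.foldl (fun b p => max b (w p)) a = a ∨ ∃ p ∈ P, P.foldl (fun b p => max b (w p)) a = w p := by
  induction P generalizing a with
  | nil => left; rfl
  | cons x P ih =>
      simp only [List.foldl_cons]
      rcases ih (max a (w x)) with he | ⟨p, hp, he⟩
      · rcases max_choice a (w x) with hm | hm
        · left; rw [he, hm]
        · right; exact ⟨x, List.mem_cons_self, by rw [he, hm]⟩
      · right; exact ⟨p, List.mem_cons_of_mem _ hp, he⟩

theorem pvKeysLe (keys : List Int) (n : Int) (hn : keys.Nodup)
    (hb : ∀ i ∈ keys, 0 ≤ i ∧ i < n) : keys.length ≤ n.toNat := by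
  have hs : keys ⊆ PySem.List.pyRange 0 n 1 := fun x hx =>
    PySem.List.mem_pyRange_one.2 ⟨(hb x hx).1, (hb x hx).2⟩
  have := List.Subperm.length_le (List.subperm_of_subset hn hs)
  simpa [PySem.List.length_pyRange_one] using this

-- ===== B-side: the chaotic-iteration loop computes pvOut =====

theorem pvInsApp (l : List (Int × Int)) (d : PySem.Dict Int (List Int)) (c : Int) :
    (l.foldl (fun d e => d.insert e.1 (d.getD e.1 [] ++ [e.2])) d).getD c []
      = d.getD c [] ++ (l.filter (fun e => e.1 == c)).map (·.2) := by
  induction l generalizing d with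
  | nil => simp
  | cons e l ih =>
      simp only [List.foldl_cons, List.filter_cons]
      rw [ih]
      by_cases h : e.1 = c
      · rw [if_pos (by simp [h]), PySem.Dict.getD_insert]
        rw [if_pos h.symm, h]
        simp
      · rw [if_neg (by simp [h]), PySem.Dict.getD_insert, if_neg (fun hc => h hc.symm)]

theorem pvPr0 (l : List Int) (d : PySem.Dict Int (List Int)) (c : Int) (h : d.getD c [] = []) :
    ((l.foldl (fun d i => d.insert i ([] : List Int)) d).getD c []) = [] := by
  induction l generalizing d with
  | nil => exact h
  | cons x l ih =>
      simp only [List.foldl_cons]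
      refine ih _ ?_
      rw [PySem.Dict.getD_insert]
      by_cases hc : c = x
      · rw [if_pos hc]
      · rw [if_neg hc]; exact h

theorem pvShape (l : List Int) (h : l.length = 2) : l = [l.getD 0 0, l.getD 1 0] := by
  match l, h with
  | [a, b], _ => rfl

theorem pvB_prereqs (n : Int) (prerequisites : List (List Int)) (c : Int) :
    (prerequisites.foldl
      (fun (d : PySem.Dict Int (List Int)) pair =>
        d.insert (pair.getD 0 0) (d.getD (pair.getD 0 0) [] ++ [pair.getD 1 0]))
      ((PySem.List.pyRange 0 n 1).foldl (fun (d : PySem.Dict Int (List Int)) i => d.insert i []) PySem.Dict.empty)).getD c []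
      = pvPrq (pvEdges prerequisites) c := by
  have hstep : prerequisites.foldl
      (fun (d : PySem.Dict Int (List Int)) pair =>
        d.insert (pair.getD 0 0) (d.getD (pair.getD 0 0) [] ++ [pair.getD 1 0]))
      ((PySem.List.pyRange 0 n 1).foldl (fun (d : PySem.Dict Int (List Int)) i => d.insert i []) PySem.Dict.empty)
      = (pvEdges prerequisites).foldl (fun d e => d.insert e.1 (d.getD e.1 [] ++ [e.2]))
        ((PySem.List.pyRange 0 n 1).foldl (fun (d : PySem.Dict Int (List Int)) i => d.insert i []) PySem.Dict.empty) := by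
    rw [pvEdges, List.foldl_map]
  rw [hstep, pvInsApp, pvPr0 _ _ _ (by rfl)]
  rfl

def pvInvB (n : Int) (E : List (Int × Int)) (t : List Int) (f : PySem.Dict Int Int) : Prop :=
  f.keys.Nodup ∧ ∀ i v, f.get? i = some v →
    0 ≤ i ∧ i < n ∧ ∃ k, pvD n E k i = true ∧ v = pvV E t k i

theorem pvB_fold (n : Int) (E : List (Int × Int)) (t : List Int)
    (prereqs : PySem.Dict Int (List Int)) (hpr : ∀ i, prereqs.getD i [] = pvPrq E i)
    (L : List Int) (hL : ∀ i ∈ L, 0 ≤ i ∧ i < n) :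
    ∀ f0 c0, pvInvB n E t f0 →
    pvInvB n E t (L.foldl
      (fun (st : PySem.Dict Int Int × Bool) i =>
        let finish := st.1
        if finish.contains i then st
        else if (prereqs.getD i []).all (fun p => finish.contains p) then
          let best := (prereqs.getD i []).foldl
            (fun b p => if finish.getD p 0 > b then finish.getD p 0 else b) 0
          (finish.insert i (best + PySem.List.pyGetD t i 0), true)
        else st) (f0, c0)).1
    ∧ (∀ i v, f0.get? i = some v → (L.foldl
      (fun (st : PySem.Dict Int Int × Bool) i =>
        let finish := st.1
        if finish.contains i then st
        else if (prereqs.getD i []).all (fun p => finish.contains p) then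
          let best := (prereqs.getD i []).foldl
            (fun b p => if finish.getD p 0 > b then finish.getD p 0 else b) 0
          (finish.insert i (best + PySem.List.pyGetD t i 0), true)
        else st) (f0, c0)).1.get? i = some v)
    ∧ f0.size ≤ (L.foldl
      (fun (st : PySem.Dict Int Int × Bool) i =>
        let finish := st.1
        if finish.contains i then st
        else if (prereqs.getD i []).all (fun p => finish.contains p) then
          let best := (prereqs.getD i []).foldl
            (fun b p => if finish.getD p 0 > b then finish.getD p 0 else b) 0
          (finish.insert i (best + PySem.List.pyGetD t i 0), true)
        else st) (f0, c0)).1.size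
    ∧ ((L.foldl
      (fun (st : PySem.Dict Int Int × Bool) i =>
        let finish := st.1
        if finish.contains i then st
        else if (prereqs.getD i []).all (fun p => finish.contains p) then
          let best := (prereqs.getD i []).foldl
            (fun b p => if finish.getD p 0 > b then finish.getD p 0 else b) 0
          (finish.insert i (best + PySem.List.pyGetD t i 0), true)
        else st) (f0, c0)).2 = false →
        c0 = false ∧ (L.foldl
      (fun (st : PySem.Dict Int Int × Bool) i =>
        let finish := st.1
        if finish.contains i then st
        else if (prereqs.getD i []).all (fun p => finish.contains p) then
          let best := (prereqs.getD i []).foldl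
            (fun b p => if finish.getD p 0 > b then finish.getD p 0 else b) 0
          (finish.insert i (best + PySem.List.pyGetD t i 0), true)
        else st) (f0, c0)).1 = f0
        ∧ ∀ i ∈ L, f0.contains i = true ∨ ∃ p ∈ pvPrq E i, f0.contains p = false)
    ∧ (c0 = false → (L.foldl
      (fun (st : PySem.Dict Int Int × Bool) i =>
        let finish := st.1
        if finish.contains i then st
        else if (prereqs.getD i []).all (fun p => finish.contains p) then
          let best := (prereqs.getD i []).foldl
            (fun b p => if finish.getD p 0 > b then finish.getD p 0 else b) 0
          (finish.insert i (best + PySem.List.pyGetD t i 0), true)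
        else st) (f0, c0)).2 = true → f0.size < (L.foldl
      (fun (st : PySem.Dict Int Int × Bool) i =>
        let finish := st.1
        if finish.contains i then st
        else if (prereqs.getD i []).all (fun p => finish.contains p) then
          let best := (prereqs.getD i []).foldl
            (fun b p => if finish.getD p 0 > b then finish.getD p 0 else b) 0
          (finish.insert i (best + PySem.List.pyGetD t i 0), true)
        else st) (f0, c0)).1.size) := by
  intro f0 c0 hInv
  induction L generalizing f0 c0 with
  | nil =>
      simp only [List.foldl_nil]
      refine ⟨hInv, fun i v h => h, le_refl _, fun h2 => ?_, fun hc0 ht => ?_⟩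
      · exact ⟨h2, by simp, by simp⟩
      · rw [hc0] at ht; cases ht
  | cons x L ih =>
      have hxb := hL x List.mem_cons_self
      have hL' : ∀ i ∈ L, 0 ≤ i ∧ i < n := fun i hi => hL i (List.mem_cons_of_mem _ hi)
      simp only [List.foldl_cons]
      by_cases hcont : f0.contains x = true
      · rw [if_pos hcont]
        obtain ⟨g1, g2, g3, g4, g5⟩ := ih hL' f0 c0 hInv
        exact ⟨g1, g2, g3, fun hf => ⟨(g4 hf).1, (g4 hf).2.1,
          fun i hi => (List.mem_cons.1 hi).elim (fun he => Or.inl (he ▸ hcont)) ((g4 hf).2.2 i)⟩, g5⟩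
      · by_cases hall : (prereqs.getD x []).all (fun p => f0.contains p) = true
        · -- insert happens
          have hmem : ∀ p ∈ pvPrq E x, f0.contains p = true := by
            rw [hpr] at hall; exact List.all_eq_true.1 hall
          have hsome : ∀ p ∈ pvPrq E x, ∃ vp, f0.get? p = some vp := by
            intro p hp
            have := hmem p hp
            rw [PySem.Dict.contains_eq_isSome_get?] at this
            exact Option.isSome_iff_exists.1 this
          obtain ⟨K, hK⟩ := pvD_common (n := n) (E := E) (pvPrq E x) (fun p hp => by
            obtain ⟨vp, hvp⟩ := hsome p hp
            obtain ⟨k, hk, _⟩ := (hInv.2 p vp hvp).2.2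
            exact ⟨k, hk⟩)
          have hDx : pvD n E (K + 1) x = true := by
            rw [pvD_succ]
            simp only [Bool.and_eq_true, List.all_eq_true, decide_eq_true_eq]
            exact ⟨⟨hxb.1, hxb.2⟩, hK⟩
          have hbest : (prereqs.getD x []).foldl
              (fun b p => if f0.getD p 0 > b then f0.getD p 0 else b) 0
              = (pvPrq E x).foldl (fun b p => max b (pvV E t K p)) 0 := by
            rw [hpr]
            refine PySem.List.foldl_congr_mem _ _ _ _ (fun b p hp => ?_)
            obtain ⟨vp, hvp⟩ := hsome p hp
            obtain ⟨k, hk, hveq⟩ := (hInv.2 p vp hvp).2.2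
            have hgd : f0.getD p 0 = pvV E t K p := by
              rw [PySem.Dict.getD_eq_get?_getD, hvp]
              exact hveq.trans (pvV_agree hk (hK p hp))
            rw [hgd]
            omega
          have hval : (prereqs.getD x []).foldl
              (fun b p => if f0.getD p 0 > b then f0.getD p 0 else b) 0 + PySem.List.pyGetD t x 0
              = pvV E t (K + 1) x := by
            rw [hbest, pvV_succ]; omega
          rw [if_neg hcont, if_pos hall]
          have hInv1 : pvInvB n E t (f0.insert x ((prereqs.getD x []).foldl
              (fun b p => if f0.getD p 0 > b then f0.getD p 0 else b) 0 + PySem.List.pyGetD t x 0)) := by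
            refine ⟨PySem.Dict.nodup_keys_insert _ _ _ hInv.1, fun j v hj => ?_⟩
            rw [PySem.Dict.get?_insert] at hj
            by_cases hjx : j = x
            · rw [if_pos hjx] at hj
              subst hjx
              refine ⟨hxb.1, hxb.2, K + 1, hDx, ?_⟩
              rw [← hval]
              exact (Option.some_inj.1 hj).symm
            · rw [if_neg hjx] at hj
              exact hInv.2 j v hj
          obtain ⟨g1, g2, g3, g4, g5⟩ := ih hL' _ true hInv1
          have hsz : f0.size < (f0.insert x ((prereqs.getD x []).foldl
              (fun b p => if f0.getD p 0 > b then f0.getD p 0 else b) 0 + PySem.List.pyGetD t x 0)).size := by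
            rw [PySem.Dict.size_insert, if_neg (by simp [hcont])]
            omega
          refine ⟨g1, fun i v hv => g2 i v ?_, le_trans (le_of_lt hsz) g3,
            fun hf => absurd ((g4 hf).1) (by simp), fun _ _ => lt_of_lt_of_le hsz g3⟩
          rw [PySem.Dict.get?_insert]
          by_cases hix : i = x
          · subst hix
            rw [PySem.Dict.contains_eq_isSome_get?, hv] at hcont
            simp at hcont
          · rw [if_neg hix]; exact hv
        · -- prerequisites not all done: skip
          rw [if_neg hcont, if_neg hall]
          obtain ⟨g1, g2, g3, g4, g5⟩ := ih hL' f0 c0 hInv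
          have hx : ∃ p ∈ pvPrq E x, f0.contains p = false := by
            rw [hpr] at hall
            simpa using hall
          exact ⟨g1, g2, g3, fun hf => ⟨(g4 hf).1, (g4 hf).2.1,
            fun i hi => (List.mem_cons.1 hi).elim (fun he => Or.inr (he ▸ hx)) ((g4 hf).2.2 i)⟩, g5⟩


theorem pvSizeLe (n : Int) (E : List (Int × Int)) (t : List Int) (f : PySem.Dict Int Int)
    (h : pvInvB n E t f) : f.size ≤ n.toNat := by
  have hk : f.keys.length ≤ n.toNat := by
    refine pvKeysLe f.keys n h.1 (fun i hi => ?_)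
    have hc : f.contains i = true := (PySem.Dict.contains_iff_mem_keys f i).2 hi
    rw [PySem.Dict.contains_eq_isSome_get?] at hc
    obtain ⟨v, hv⟩ := Option.isSome_iff_exists.1 hc
    exact ⟨(h.2 i v hv).1, (h.2 i v hv).2.1⟩
  simpa [PySem.Dict.keys, PySem.Dict.size] using hk

theorem pvB_round_def (n : Int) (prereqs : PySem.Dict Int (List Int)) (t : List Int)
    (f0 : PySem.Dict Int Int) :
    pvB_round n prereqs t f0 = (PySem.List.pyRange 0 n 1).foldl
      (fun (st : PySem.Dict Int Int × Bool) i =>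
        let finish := st.1
        if finish.contains i then st
        else if (prereqs.getD i []).all (fun p => finish.contains p) then
          let best := (prereqs.getD i []).foldl
            (fun b p => if finish.getD p 0 > b then finish.getD p 0 else b) 0
          (finish.insert i (best + PySem.List.pyGetD t i 0), true)
        else st) (f0, false) := rfl

theorem pvB_loop_lem (n : Int) (E : List (Int × Int)) (t : List Int)
    (prereqs : PySem.Dict Int (List Int)) (hpr : ∀ i, prereqs.getD i [] = pvPrq E i) :
    ∀ fuel f, pvInvB n E t f → n.toNat < fuel + f.size →
    pvInvB n E t (pvB_loop n prereqs t fuel f)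
    ∧ ∀ i, 0 ≤ i → i < n → (pvB_loop n prereqs t fuel f).contains i = true
        ∨ ∃ p ∈ pvPrq E i, (pvB_loop n prereqs t fuel f).contains p = false := by
  intro fuel
  induction fuel with
  | zero =>
      intro f hInv hsz
      have := pvSizeLe n E t f hInv
      omega
  | succ fuel ih =>
      intro f hInv hsz
      obtain ⟨g1, g2, g3, g4, g5⟩ := pvB_fold n E t prereqs hpr (PySem.List.pyRange 0 n 1)
        (fun i hi => PySem.List.mem_pyRange_one.1 hi) f false hInv
      rw [← pvB_round_def n prereqs t f] at g1 g3 g4 g5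
      by_cases hr : (pvB_round n prereqs t f).2 = true
      · have hred : pvB_loop n prereqs t (fuel + 1) f = pvB_loop n prereqs t fuel (pvB_round n prereqs t f).1 := by
          simp only [pvB_loop]
          rw [if_pos hr]
        rw [hred]
        refine ih (pvB_round n prereqs t f).1 g1 ?_
        have := g5 rfl hr
        omega
      · have hf : (pvB_round n prereqs t f).2 = false := by
          cases h : (pvB_round n prereqs t f).2
          · rfl
          · exact absurd h hr
        have hred : pvB_loop n prereqs t (fuel + 1) f = (pvB_round n prereqs t f).1 := by
          simp only [pvB_loop]
          rw [if_neg (by rw [hf]; simp)]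
        obtain ⟨-, heq, hcl⟩ := g4 hf
        rw [hred, heq]
        exact ⟨hInv, fun i h0 h1 => hcl i (PySem.List.mem_pyRange_one.2 ⟨h0, h1⟩)⟩

theorem pvB_out (n : Int) (E : List (Int × Int)) (t : List Int)
    (prereqs : PySem.Dict Int (List Int)) (hpr : ∀ i, prereqs.getD i [] = pvPrq E i) :
    ∀ i, 0 ≤ i → i < n →
      pvOut n E t i ((pvB_loop n prereqs t (n.toNat + 2) PySem.Dict.empty).getD i 0) := by
  have hInv0 : pvInvB n E t PySem.Dict.empty := by
    constructor
    · simp [PySem.Dict.keys_empty]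
    · intro i v hv
      rw [PySem.Dict.get?_empty] at hv
      cases hv
  obtain ⟨hInv, hcl⟩ := pvB_loop_lem n E t prereqs hpr (n.toNat + 2) PySem.Dict.empty hInv0
    (by rw [PySem.Dict.size_empty]; omega)
  intro i h0 h1
  by_cases hc : (pvB_loop n prereqs t (n.toNat + 2) PySem.Dict.empty).contains i = true
  · have hc' := hc
    rw [PySem.Dict.contains_eq_isSome_get?] at hc'
    obtain ⟨v, hv⟩ := Option.isSome_iff_exists.1 hc'
    obtain ⟨-, -, k, hk, hveq⟩ := hInv.2 i v hv
    rw [PySem.Dict.getD_eq_get?_getD, hv]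
    exact Or.inl ⟨k, hk, hveq⟩
  · have hc' : (pvB_loop n prereqs t (n.toNat + 2) PySem.Dict.empty).contains i = false := by
      cases h : (pvB_loop n prereqs t (n.toNat + 2) PySem.Dict.empty).contains i
      · rfl
      · exact absurd h hc
    refine Or.inr ⟨?_, PySem.Dict.getD_of_not_contains _ _ hc'⟩
    rintro ⟨k, hk⟩
    have hS := pvD_closure (n := n) (E := E)
      (fun j => (pvB_loop n prereqs t (n.toNat + 2) PySem.Dict.empty).contains j = true)
      (fun j hj0 hj1 hps => ?_) k i hk
    · exact hc hS
    · rcases hcl j hj0 hj1 with h | ⟨p, hp, hpc⟩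
      · exact h
      · rw [hps p hp] at hpc
        cases hpc

-- ===== A-side: Kahn's algorithm computes pvOut =====

theorem pvCnt (cs : List Int) :
    ∀ a : List Int, (∀ c ∈ cs, 0 ≤ c ∧ c < (a.length : Int)) →
    (cs.foldl (fun a c => PySem.List.pySetD a c (PySem.List.pyGetD a c 0 + 1)) a).length = a.length
    ∧ ∀ i, 0 ≤ i → i < (a.length : Int) →
      PySem.List.pyGetD (cs.foldl (fun a c => PySem.List.pySetD a c (PySem.List.pyGetD a c 0 + 1)) a) i 0
        = PySem.List.pyGetD a i 0 + cs.count i := by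
  induction cs with
  | nil => intro a _; exact ⟨rfl, fun i _ _ => by simp⟩
  | cons c cs ih =>
      intro a hb
      have hc := hb c List.mem_cons_self
      have hb' : ∀ x ∈ cs, 0 ≤ x ∧ x < ((PySem.List.pySetD a c (PySem.List.pyGetD a c 0 + 1)).length : Int) := by
        intro x hx
        rw [PySem.List.length_pySetD]
        exact hb x (List.mem_cons_of_mem _ hx)
      obtain ⟨hlen, hval⟩ := ih (PySem.List.pySetD a c (PySem.List.pyGetD a c 0 + 1)) hb'
      simp only [List.foldl_cons]
      constructor
      · rw [hlen, PySem.List.length_pySetD]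
      · intro i h0 h1
        rw [hval i h0 (by rw [PySem.List.length_pySetD]; exact h1),
            pvGS a c i _ hc.1 h0 h1, List.count_cons]
        by_cases hic : i = c
        · rw [if_pos hic, if_pos (by simp [hic]), hic]
          omega
        · rw [if_neg hic, if_neg (by simp; omega)]
          omega

theorem pvPrqBounds (n : Int) (E : List (Int × Int)) (hE : ∀ e ∈ E, 0 ≤ e.1 ∧ e.1 < n)
    (p c : Int) (hc : c ∈ pvGrf E p) : 0 ≤ c ∧ c < n := by
  unfold pvGrf at hc
  obtain ⟨e, he, rfl⟩ := List.mem_map.1 hc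
  exact hE e (List.mem_filter.1 he).1

theorem pvNdegNil (E : List (Int × Int)) (i : Int) :
    pvNdeg E [] i = ((pvPrq E i).length : Int) := by
  unfold pvNdeg
  simp

theorem pvEdgesBounds (n : Int) (prerequisites : List (List Int))
    (hP : ∀ l ∈ prerequisites, l.length = 2 ∧ 0 ≤ l.getD 0 0 ∧ l.getD 0 0 < n) :
    ∀ e ∈ pvEdges prerequisites, 0 ≤ e.1 ∧ e.1 < n := by
  intro e he
  obtain ⟨l, hl, rfl⟩ := List.mem_map.1 he
  exact ⟨(hP l hl).2.1, (hP l hl).2.2⟩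

theorem pvA_build (n : Int) (prerequisites : List (List Int))
    (hP : ∀ l ∈ prerequisites, l.length = 2 ∧ 0 ≤ l.getD 0 0 ∧ l.getD 0 0 < n) :
    (∀ p, (prerequisites.foldl
      (fun (st : PySem.Dict Int (List Int) × List Int) pair =>
        match pair with
        | course :: prereq :: _ =>
            (st.1.modify prereq [] (· ++ [course]),
             PySem.List.pySetD st.2 course (PySem.List.pyGetD st.2 course 0 + 1))
        | _ => st)
      (PySem.Dict.empty, List.replicate n.toNat 0)).1.getD p [] = pvGrf (pvEdges prerequisites) p)
    ∧ (prerequisites.foldl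
      (fun (st : PySem.Dict Int (List Int) × List Int) pair =>
        match pair with
        | course :: prereq :: _ =>
            (st.1.modify prereq [] (· ++ [course]),
             PySem.List.pySetD st.2 course (PySem.List.pyGetD st.2 course 0 + 1))
        | _ => st)
      (PySem.Dict.empty, List.replicate n.toNat 0)).2.length = n.toNat
    ∧ ∀ i, 0 ≤ i → i < n → PySem.List.pyGetD (prerequisites.foldl
      (fun (st : PySem.Dict Int (List Int) × List Int) pair =>
        match pair with
        | course :: prereq :: _ =>
            (st.1.modify prereq [] (· ++ [course]),
             PySem.List.pySetD st.2 course (PySem.List.pyGetD st.2 course 0 + 1))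
        | _ => st)
      (PySem.Dict.empty, List.replicate n.toNat 0)).2 i 0 = pvNdeg (pvEdges prerequisites) [] i := by
  have hsplit : prerequisites.foldl
      (fun (st : PySem.Dict Int (List Int) × List Int) pair =>
        match pair with
        | course :: prereq :: _ =>
            (st.1.modify prereq [] (· ++ [course]),
             PySem.List.pySetD st.2 course (PySem.List.pyGetD st.2 course 0 + 1))
        | _ => st)
      (PySem.Dict.empty, List.replicate n.toNat 0)
      = (prerequisites.foldl (fun (d : PySem.Dict Int (List Int)) l =>
            d.modify (l.getD 1 0) [] (· ++ [l.getD 0 0])) PySem.Dict.empty,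
         prerequisites.foldl (fun (a : List Int) l =>
            PySem.List.pySetD a (l.getD 0 0) (PySem.List.pyGetD a (l.getD 0 0) 0 + 1)) (List.replicate n.toNat 0)) := by
    rw [← PySem.List.foldl_prod_mk
      (f := fun (d : PySem.Dict Int (List Int)) (l : List Int) => d.modify (l.getD 1 0) [] (· ++ [l.getD 0 0]))
      (g := fun (a : List Int) (l : List Int) => PySem.List.pySetD a (l.getD 0 0) (PySem.List.pyGetD a (l.getD 0 0) 0 + 1))]
    refine PySem.List.foldl_congr_mem _ _ _ _ (fun st l hl => ?_)
    rw [pvShape l (hP l hl).1]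
    rfl
  rw [hsplit]
  refine ⟨?_, ?_, ?_⟩
  · intro p
    have hmap : prerequisites.foldl (fun (d : PySem.Dict Int (List Int)) l =>
          d.modify (l.getD 1 0) [] (· ++ [l.getD 0 0])) PySem.Dict.empty
        = ((pvEdges prerequisites).map (fun e => (e.2, e.1))).foldl
            (fun d e => d.modify e.1 [] (· ++ [e.2])) PySem.Dict.empty := by
      rw [pvEdges, List.map_map, List.foldl_map]
      rfl
    rw [hmap, PySem.Dict.getD_foldl_modify_append]
    rw [PySem.Dict.getD_empty]
    unfold pvGrf
    rw [List.filter_map, List.map_map]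
    rfl
  · have := (pvCnt (prerequisites.map (fun l => l.getD 0 0)) (List.replicate n.toNat 0) ?_).1
    · rw [List.foldl_map] at this
      rw [this, List.length_replicate]
    · intro c hc
      obtain ⟨l, hl, rfl⟩ := List.mem_map.1 hc
      rw [List.length_replicate]
      refine ⟨(hP l hl).2.1, ?_⟩
      have := (hP l hl).2.2
      omega
  · intro i h0 h1
    have hcnt := pvCnt (prerequisites.map (fun l => l.getD 0 0)) (List.replicate n.toNat 0) ?_
    · rw [List.foldl_map] at hcnt
      rw [hcnt.2 i h0 (by rw [List.length_replicate]; omega),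
          pvGetRepl n.toNat i h0 (by omega), pvNdegNil]
      have : (prerequisites.map (fun l => l.getD 0 0)).count i = (pvPrq (pvEdges prerequisites) i).length := by
        unfold pvPrq pvEdges
        rw [List.count_eq_countP, List.countP_map, List.length_map,
            ← List.countP_eq_length_filter, List.countP_map]
        rfl
      rw [this]
      omega
    · intro c hc
      obtain ⟨l, hl, rfl⟩ := List.mem_map.1 hc
      rw [List.length_replicate]
      refine ⟨(hP l hl).2.1, ?_⟩
      have := (hP l hl).2.2
      omega

theorem pvA_initFold (n : Int) (indeg time : List Int) :
    ∀ (L : List Int) (ee q0 : List Int), ee.length = n.toNat → (∀ i ∈ L, 0 ≤ i ∧ i < n) →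
    (L.foldl (fun (st : List Int × List Int) i =>
        if PySem.List.pyGetD indeg i 0 == 0 then
          (st.1 ++ [i], PySem.List.pySetD st.2 i (PySem.List.pyGetD time i 0))
        else st) (q0, ee)).1
      = q0 ++ L.filter (fun i => PySem.List.pyGetD indeg i 0 == 0)
    ∧ (L.foldl (fun (st : List Int × List Int) i =>
        if PySem.List.pyGetD indeg i 0 == 0 then
          (st.1 ++ [i], PySem.List.pySetD st.2 i (PySem.List.pyGetD time i 0))
        else st) (q0, ee)).2.length = n.toNat
    ∧ ∀ i, 0 ≤ i → i < n →
      PySem.List.pyGetD (L.foldl (fun (st : List Int × List Int) i =>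
        if PySem.List.pyGetD indeg i 0 == 0 then
          (st.1 ++ [i], PySem.List.pySetD st.2 i (PySem.List.pyGetD time i 0))
        else st) (q0, ee)).2 i 0
        = if i ∈ L ∧ (PySem.List.pyGetD indeg i 0 == 0) = true then PySem.List.pyGetD time i 0
          else PySem.List.pyGetD ee i 0 := by
  intro L
  induction L with
  | nil =>
      intro ee q0 hlen _
      refine ⟨by simp, hlen, fun i _ _ => by simp⟩
  | cons x L ih =>
      intro ee q0 hlen hb
      have hxb := hb x List.mem_cons_self
      have hb' : ∀ i ∈ L, 0 ≤ i ∧ i < n := fun i hi => hb i (List.mem_cons_of_mem _ hi)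
      simp only [List.foldl_cons, List.filter_cons]
      by_cases hx : (PySem.List.pyGetD indeg x 0 == 0) = true
      · rw [if_pos hx, if_pos hx]
        obtain ⟨h1, h2, h3⟩ := ih (PySem.List.pySetD ee x (PySem.List.pyGetD time x 0)) (q0 ++ [x])
          (by rw [PySem.List.length_pySetD]; exact hlen) hb'
        refine ⟨by rw [h1, List.append_assoc]; rfl, h2, fun i h0 h1' => ?_⟩
        rw [h3 i h0 h1', pvGS ee x i _ hxb.1 h0 (by rw [hlen]; omega)]
        by_cases hiL : i ∈ L ∧ (PySem.List.pyGetD indeg i 0 == 0) = true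
        · rw [if_pos hiL, if_pos ⟨List.mem_cons_of_mem _ hiL.1, hiL.2⟩]
        · rw [if_neg hiL]
          by_cases hix : i = x
          · rw [if_pos hix, if_pos ⟨by rw [hix]; exact List.mem_cons_self, by rw [hix]; exact hx⟩]
            rw [hix]
          · rw [if_neg hix, if_neg ?_]
            rintro ⟨hmem, hz⟩
            rcases List.mem_cons.1 hmem with h | h
            · exact hix h
            · exact hiL ⟨h, hz⟩
      · rw [if_neg hx, if_neg hx]
        obtain ⟨h1, h2, h3⟩ := ih ee q0 hlen hb'
        refine ⟨h1, h2, fun i h0 h1' => ?_⟩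
        rw [h3 i h0 h1']
        by_cases hiL : i ∈ L ∧ (PySem.List.pyGetD indeg i 0 == 0) = true
        · rw [if_pos hiL, if_pos ⟨List.mem_cons_of_mem _ hiL.1, hiL.2⟩]
        · rw [if_neg hiL, if_neg ?_]
          rintro ⟨hmem, hz⟩
          rcases List.mem_cons.1 hmem with h | h
          · rw [h] at hz
            exact hx hz
          · exact hiL ⟨h, hz⟩

def pvInvA (n : Int) (E : List (Int × Int)) (t : List Int) (w : Int → Int)
    (P Q : List Int) (indeg es ee : List Int) : Prop :=
  indeg.length = n.toNat ∧ es.length = n.toNat ∧ ee.length = n.toNat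
  ∧ (P ++ Q).Nodup
  ∧ (∀ x ∈ P ++ Q, 0 ≤ x ∧ x < n)
  ∧ (∀ i, 0 ≤ i → i < n → PySem.List.pyGetD indeg i 0 = pvNdeg E P i)
  ∧ (∀ i, 0 ≤ i → i < n → PySem.List.pyGetD es i 0 = pvEsF E w i P)
  ∧ (∀ i, 0 ≤ i → i < n → PySem.List.pyGetD ee i 0 = if i ∈ P ++ Q then w i else 0)
  ∧ (∀ i ∈ P ++ Q, ∃ k, pvD n E k i = true ∧ w i = pvV E t k i)
  ∧ (∀ i ∈ P ++ Q, ∀ p ∈ pvPrq E i, p ∈ P)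
  ∧ (∀ i, 0 ≤ i → i < n → i ∉ P ++ Q → pvNdeg E P i ≠ 0)

def pvMid (n : Int) (E : List (Int × Int)) (t : List Int) (w : Int → Int)
    (P : List Int) (pstar : Int) (rest : List Int)
    (L nq : List Int) (indeg es ee : List Int) : Prop :=
  indeg.length = n.toNat ∧ es.length = n.toNat ∧ ee.length = n.toNat
  ∧ (P ++ pstar :: (rest ++ nq)).Nodup
  ∧ (∀ x ∈ P ++ pstar :: (rest ++ nq), 0 ≤ x ∧ x < n)
  ∧ (∀ i, 0 ≤ i → i < n → PySem.List.pyGetD indeg i 0 = pvNdeg E P i - (L.count i : Int))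
  ∧ (∀ i, 0 ≤ i → i < n → PySem.List.pyGetD es i 0
      = if i ∈ L then max (pvEsF E w i P) (w pstar) else pvEsF E w i P)
  ∧ (∀ i, 0 ≤ i → i < n → PySem.List.pyGetD ee i 0
      = if i ∈ P ++ pstar :: (rest ++ nq) then w i else 0)
  ∧ (∀ i ∈ P ++ pstar :: (rest ++ nq), ∃ k, pvD n E k i = true ∧ w i = pvV E t k i)
  ∧ (∀ i ∈ P ++ [pstar], ∀ p ∈ pvPrq E i, p ∈ P)
  ∧ (∀ i ∈ rest, ∀ p ∈ pvPrq E i, p ∈ P)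
  ∧ (∀ i ∈ nq, ∀ p ∈ pvPrq E i, p ∈ P ++ [pstar])
  ∧ (∀ c ∈ nq, pvNdeg E P c ≤ (L.count c : Int))
  ∧ (∀ i, 0 ≤ i → i < n → i ∉ P ++ pstar :: (rest ++ nq) → pvNdeg E P i - (L.count i : Int) ≠ 0)

theorem pvEsF_congr (E : List (Int × Int)) (w w' : Int → Int) (i : Int) (P : List Int)
    (h : ∀ p ∈ P, w' p = w p) : pvEsF E w' i P = pvEsF E w i P := by
  unfold pvEsF
  refine PySem.List.foldl_congr_mem _ _ _ _ (fun b p hp => ?_)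
  rw [h p hp]

theorem pvEsF_snoc (E : List (Int × Int)) (w : Int → Int) (i : Int) (P : List Int) (pstar : Int) :
    pvEsF E w i (P ++ [pstar])
      = if pstar ∈ pvPrq E i then max (pvEsF E w i P) (w pstar) else pvEsF E w i P := by
  unfold pvEsF
  rw [List.foldl_append]
  rfl

theorem pvNdegPop (E : List (Int × Int)) (P : List Int) (pstar : Int) (hps : pstar ∉ P) (i : Int) :
    pvNdeg E (P ++ [pstar]) i = pvNdeg E P i - ((pvPrq E i).count pstar : Int) := by
  have := pvFilterPop P pstar hps (pvPrq E i)
  unfold pvNdeg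
  omega

theorem pvAllPstar (l : List Int) (P : List Int) (pstar : Int) (hps : pstar ∉ P)
    (h : l.countP (fun p => !decide (p ∈ P)) ≤ l.count pstar) :
    ∀ p ∈ l, p ∉ P → p = pstar := by
  have hsplit := pvCountSplit pstar (fun p => !decide (p ∈ P)) (by simp [hps]) l
  have hzero : l.countP (fun p => (!decide (p ∈ P)) && !(p == pstar)) = 0 := by omega
  intro p hp hpP
  by_contra hne
  have := List.countP_eq_zero.1 hzero p hp
  simp [hpP, hne] at this

theorem pvNdegNeZero (E : List (Int × Int)) (P : List Int) (i : Int)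
    (h : pvNdeg E P i ≠ 0) : ∃ p ∈ pvPrq E i, p ∉ P := by
  unfold pvNdeg at h
  have : (pvPrq E i).countP (fun p => !decide (p ∈ P)) ≠ 0 := by omega
  by_contra hall
  refine this (List.countP_eq_zero.2 (fun p hp => ?_))
  simp only [not_exists, not_and] at hall
  simpa using hall p hp

theorem pvMaxSet (w : Int → Int) (l P : List Int) (pstar : Int)
    (hsub : ∀ p ∈ l, p ∈ P ∨ p = pstar) (hps : pstar ∈ l) :
    max (P.foldl (fun b p => if p ∈ l then max b (w p) else b) 0) (w pstar)
      = l.foldl (fun b p => max b (w p)) 0 := by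
  have hge := (PySem.List.le_foldl_max_int l w 0).1
  have hub := (PySem.List.le_foldl_max_int l w 0).2
  refine le_antisymm (max_le ?_ (hub pstar hps)) ?_
  · rcases pvMax_mem w (fun p => p ∈ l) P 0 with he | ⟨p, _, hc, he⟩
    · rw [he]; exact hge
    · rw [he]; exact hub p hc
  · rcases pvMaxU_mem w l 0 with he | ⟨p, hp, he⟩
    · rw [he]
      exact le_trans (pvMax_ge w (fun p => p ∈ l) P 0) (le_max_left _ _)
    · rw [he]
      rcases hsub p hp with hP | rfl
      · exact le_trans (pvMax_ub w (fun p => p ∈ l) P 0 p hP hp) (le_max_left _ _)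
      · exact le_max_right _ _

theorem pvA_inner (n : Int) (E : List (Int × Int)) (t : List Int)
    (hE : ∀ e ∈ E, 0 ≤ e.1 ∧ e.1 < n) (pstar : Int) (P rest : List Int) :
    ∀ (R L nq : List Int) (w : Int → Int) (indeg es ee : List Int),
    pvGrf E pstar = L ++ R →
    pvMid n E t w P pstar rest L nq indeg es ee →
    ∃ nq' w' indeg' es' ee',
      R.foldl (pvA_relax t pstar) (rest ++ nq, indeg, es, ee) = (rest ++ nq', indeg', es', ee')
      ∧ pvMid n E t w' P pstar rest (L ++ R) nq' indeg' es' ee' := by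
  intro R
  induction R with
  | nil =>
      intro L nq w indeg es ee hG hMid
      exact ⟨nq, w, indeg, es, ee, rfl, by simpa using hMid⟩
  | cons c R ih =>
      intro L nq w indeg es ee hG hMid
      obtain ⟨hl1, hl2, hl3, hnd, hbnd, hindeg, hes, hee, hex, hprqP, hprqR, hprqN, hcntN, hwait⟩ := hMid
      have hcG : c ∈ pvGrf E pstar := by rw [hG]; simp
      have hcb : 0 ≤ c ∧ c < n := pvPrqBounds n E hE pstar c hcG
      have hpsprq : pstar ∈ pvPrq E c := (pvMemGrf E pstar c).1 hcG
      have hpsb : 0 ≤ pstar ∧ pstar < n := hbnd pstar (by simp)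
      have hpsP : pstar ∉ P := fun hm =>
        (List.nodup_append.1 hnd).2.2 pstar hm pstar List.mem_cons_self rfl
      have heeps : PySem.List.pyGetD ee pstar 0 = w pstar := by
        rw [hee pstar hpsb.1 hpsb.2, if_pos (by simp)]
      have hesc : PySem.List.pyGetD (PySem.List.pySetD es c
            (max (PySem.List.pyGetD es c 0) (PySem.List.pyGetD ee pstar 0))) c 0
          = max (pvEsF E w c P) (w pstar) := by
        rw [pvGS es c c _ hcb.1 hcb.1 (by rw [hl2]; omega), if_pos rfl, heeps,
            hes c hcb.1 hcb.2]
        by_cases hcL : c ∈ L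
        · rw [if_pos hcL]; omega
        · rw [if_neg hcL]
      have hideg1 : PySem.List.pyGetD (PySem.List.pySetD indeg c (PySem.List.pyGetD indeg c 0 - 1)) c 0
          = pvNdeg E P c - ((L ++ [c]).count c : Int) := by
        rw [pvGS indeg c c _ hcb.1 hcb.1 (by rw [hl1]; omega), if_pos rfl,
            hindeg c hcb.1 hcb.2, List.count_append]
        simp
        omega
      simp only [List.foldl_cons, pvA_relax]
      by_cases hzero : (PySem.List.pyGetD (PySem.List.pySetD indeg c (PySem.List.pyGetD indeg c 0 - 1)) c 0 == 0) = true
      · -- c's in-degree reaches 0: enqueue c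
        rw [if_pos hzero]
        have hz : pvNdeg E P c - ((L ++ [c]).count c : Int) = 0 := by
          rw [← hideg1]
          simpa using hzero
        have hcM : c ∉ P ++ pstar :: (rest ++ nq) := by
          intro hmem
          rcases List.mem_append.1 hmem with hP | hQ
          · exact absurd (hprqP c (List.mem_append_left _ hP) pstar hpsprq) hpsP
          · rcases List.mem_cons.1 hQ with rfl | hRN
            · exact absurd (hprqP c (by simp) c hpsprq) hpsP
            · rcases List.mem_append.1 hRN with hR | hN
              · exact absurd (hprqR c hR pstar hpsprq) hpsP
              · have := hcntN c hN
                have hcc : ((L ++ [c]).count c : Int) = (L.count c : Int) + 1 := by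
                  rw [List.count_append]; simp
                omega
        have hprqc : ∀ p ∈ pvPrq E c, p ∈ P ++ [pstar] := by
          have hle : pvNdeg E P c ≤ ((pvPrq E c).count pstar : Int) := by
            have h1 : ((L ++ [c]).count c : Int) ≤ ((pvGrf E pstar).count c : Int) := by
              rw [hG]
              simp [List.count_append]
            rw [pvCountGrf] at h1
            omega
          intro p hp
          by_cases hpP : p ∈ P
          · exact List.mem_append_left _ hpP
          · have : p = pstar := by
              refine pvAllPstar (pvPrq E c) P pstar hpsP ?_ p hp hpP
              unfold pvNdeg at hle
              omega
            rw [this]; simp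
        have hexprq : ∀ p ∈ pvPrq E c, ∃ k, pvD n E k p = true ∧ w p = pvV E t k p := by
          intro p hp
          rcases List.mem_append.1 (hprqc p hp) with hP | hps
          · exact hex p (List.mem_append_left _ hP)
          · rw [List.mem_singleton.1 hps]
            exact hex pstar (by simp)
        obtain ⟨K, hK⟩ := pvD_common (n := n) (E := E) (pvPrq E c)
          (fun p hp => by obtain ⟨k, hk, -⟩ := hexprq p hp; exact ⟨k, hk⟩)
        have hDc : pvD n E (K + 1) c = true := by
          rw [pvD_succ]
          simp only [Bool.and_eq_true, List.all_eq_true, decide_eq_true_eq]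
          exact ⟨⟨hcb.1, hcb.2⟩, hK⟩
        have hvc : max (pvEsF E w c P) (w pstar) + PySem.List.pyGetD t c 0 = pvV E t (K + 1) c := by
          have hset : max (pvEsF E w c P) (w pstar) = (pvPrq E c).foldl (fun b p => max b (w p)) 0 := by
            unfold pvEsF
            refine pvMaxSet w (pvPrq E c) P pstar ?_ hpsprq
            intro p hp
            rcases List.mem_append.1 (hprqc p hp) with hP | hps
            · exact Or.inl hP
            · exact Or.inr (List.mem_singleton.1 hps)
          rw [hset, pvV_succ]
          have hcongr : (pvPrq E c).foldl (fun b p => max b (w p)) 0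
              = (pvPrq E c).foldl (fun b p => max b (pvV E t K p)) 0 := by
            refine PySem.List.foldl_congr_mem _ _ _ _ (fun b p hp => ?_)
            obtain ⟨k, hk, hv⟩ := hexprq p hp
            rw [hv, pvV_agree hk (hK p hp)]
          rw [hcongr]
          omega
        have hG' : pvGrf E pstar = (L ++ [c]) ++ R := by rw [hG, List.append_assoc]; rfl
        have hMid1 : pvMid n E t
            (fun x => if x = c then max (pvEsF E w c P) (w pstar) + PySem.List.pyGetD t c 0 else w x)
            P pstar rest (L ++ [c]) (nq ++ [c])
            (PySem.List.pySetD indeg c (PySem.List.pyGetD indeg c 0 - 1))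
            (PySem.List.pySetD es c (max (PySem.List.pyGetD es c 0) (PySem.List.pyGetD ee pstar 0)))
            (PySem.List.pySetD ee c (PySem.List.pyGetD (PySem.List.pySetD es c
              (max (PySem.List.pyGetD es c 0) (PySem.List.pyGetD ee pstar 0))) c 0
              + PySem.List.pyGetD t c 0)) := by
          have hMeq : P ++ pstar :: (rest ++ (nq ++ [c]))
              = (P ++ pstar :: (rest ++ nq)) ++ [c] := by simp
          have hcP : c ∉ P := fun h => hcM (List.mem_append_left _ h)
          have hpsM : pstar ∈ P ++ pstar :: (rest ++ nq) := by simp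
          have hwps : (if pstar = c then max (pvEsF E w c P) (w pstar) + PySem.List.pyGetD t c 0
              else w pstar) = w pstar := if_neg (fun (h : pstar = c) => hcM (h ▸ hpsM))
          have hwP : ∀ p ∈ P, (if p = c then max (pvEsF E w c P) (w pstar) + PySem.List.pyGetD t c 0
              else w p) = w p := fun p hp => if_neg (fun (h : p = c) => hcP (h ▸ hp))
          have hesFc : ∀ i, pvEsF E (fun x => if x = c then max (pvEsF E w c P) (w pstar)
              + PySem.List.pyGetD t c 0 else w x) i P = pvEsF E w i P :=
            fun i => pvEsF_congr E w _ i P hwP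
          refine ⟨by rw [PySem.List.length_pySetD]; exact hl1,
                  by rw [PySem.List.length_pySetD]; exact hl2,
                  by rw [PySem.List.length_pySetD]; exact hl3, ?_, ?_, ?_, ?_, ?_, ?_,
                  hprqP, hprqR, ?_, ?_, ?_⟩
          · rw [hMeq]
            refine List.nodup_append.2 ⟨hnd, List.nodup_singleton _, ?_⟩
            intro a ha b hb
            rw [List.mem_singleton.1 hb]
            intro h
            exact hcM (h ▸ ha)
          · intro x hx
            rw [hMeq, List.mem_append, List.mem_singleton] at hx
            rcases hx with hx | rfl
            · exact hbnd x hx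
            · exact hcb
          · intro i h0 h1
            rw [pvGS indeg c i _ hcb.1 h0 (by rw [hl1]; omega)]
            by_cases hic : i = c
            · subst hic
              rw [if_pos rfl, hindeg i h0 h1, List.count_append]
              have : ([i]).count i = 1 := by simp
              omega
            · rw [if_neg hic, hindeg i h0 h1, List.count_append]
              have : ([c]).count i = 0 := List.count_eq_zero.2 (by simpa using hic)
              omega
          · intro i h0 h1
            dsimp only
            rw [hwps, hesFc i, pvGS es c i _ hcb.1 h0 (by rw [hl2]; omega)]
            by_cases hic : i = c
            · subst hic
              rw [if_pos rfl, if_pos (by simp), heeps, hes i h0 h1]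
              by_cases hiL : i ∈ L
              · rw [if_pos hiL]
                omega
              · rw [if_neg hiL]
            · rw [if_neg hic, hes i h0 h1]
              have hmm : (i ∈ L ++ [c]) ↔ (i ∈ L) := by simp [hic]
              simp only [hmm]
          · intro i h0 h1
            dsimp only
            rw [pvGS ee c i _ hcb.1 h0 (by rw [hl3]; omega)]
            by_cases hic : i = c
            · subst hic
              rw [if_pos rfl, if_pos (by rw [hMeq]; simp), if_pos rfl, hesc]
            · rw [if_neg hic, hee i h0 h1, if_neg hic]
              have hmm : (i ∈ P ++ pstar :: (rest ++ (nq ++ [c]))) ↔ (i ∈ P ++ pstar :: (rest ++ nq)) := by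
                rw [hMeq]; simp [List.mem_append, hic]
              simp only [hmm]
          · intro i hi
            rw [hMeq, List.mem_append, List.mem_singleton] at hi
            dsimp only
            rcases hi with hi | rfl
            · have hic : i ≠ c := fun h => hcM (h ▸ hi)
              rw [if_neg hic]
              exact hex i hi
            · rw [if_pos rfl]
              exact ⟨K + 1, hDc, by
                rw [← hvc]⟩
          · intro i hi
            rcases List.mem_append.1 hi with hi | hi
            · exact hprqN i hi
            · rw [List.mem_singleton.1 hi]
              exact hprqc
          · intro x hx
            rcases List.mem_append.1 hx with hx | hx
            · have := hcntN x hx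
              have h2 : L.count x ≤ (L ++ [c]).count x := by
                rw [List.count_append]; omega
              omega
            · rw [List.mem_singleton.1 hx]
              omega
          · intro i h0 h1 hi
            rw [hMeq, List.mem_append, List.mem_singleton] at hi
            rw [not_or] at hi
            rw [List.count_append]
            have : ([c]).count i = 0 := List.count_eq_zero.2 (by simpa using hi.2)
            have := hwait i h0 h1 hi.1
            omega
        obtain ⟨nq', w', indeg', es', ee', heq, hMid'⟩ := ih (L ++ [c]) (nq ++ [c]) _ _ _ _ hG' hMid1
        refine ⟨nq', w', indeg', es', ee', ?_, ?_⟩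
        · rw [List.append_assoc rest nq [c]]
          exact heq
        · rwa [show (L ++ [c]) ++ R = L ++ c :: R from by simp] at hMid'
      · -- c still has missing prerequisites: no enqueue
        rw [if_neg hzero]
        have hG' : pvGrf E pstar = (L ++ [c]) ++ R := by rw [hG, List.append_assoc]; rfl
        have hMid1 : pvMid n E t w P pstar rest (L ++ [c]) nq
            (PySem.List.pySetD indeg c (PySem.List.pyGetD indeg c 0 - 1))
            (PySem.List.pySetD es c (max (PySem.List.pyGetD es c 0) (PySem.List.pyGetD ee pstar 0)))
            ee := by
          refine ⟨by rw [PySem.List.length_pySetD]; exact hl1,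
                  by rw [PySem.List.length_pySetD]; exact hl2,
                  hl3, hnd, hbnd, ?_, ?_, hee, hex, hprqP, hprqR, hprqN, ?_, ?_⟩
          · intro i h0 h1
            rw [pvGS indeg c i _ hcb.1 h0 (by rw [hl1]; omega)]
            by_cases hic : i = c
            · subst hic
              rw [if_pos rfl, hindeg i h0 h1, List.count_append]
              have : ([i]).count i = 1 := by simp
              omega
            · rw [if_neg hic, hindeg i h0 h1, List.count_append]
              have : ([c]).count i = 0 := List.count_eq_zero.2 (by simpa using hic)
              omega
          · intro i h0 h1
            rw [pvGS es c i _ hcb.1 h0 (by rw [hl2]; omega)]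
            by_cases hic : i = c
            · subst hic
              rw [if_pos rfl, if_pos (by simp), heeps, hes i h0 h1]
              by_cases hiL : i ∈ L
              · rw [if_pos hiL]
                omega
              · rw [if_neg hiL]
            · rw [if_neg hic, hes i h0 h1]
              have hmm : (i ∈ L ++ [c]) ↔ (i ∈ L) := by simp [hic]
              simp only [hmm]
          · intro x hx
            have := hcntN x hx
            have h2 : L.count x ≤ (L ++ [c]).count x := by
              rw [List.count_append]; omega
            omega
          · intro i h0 h1 hi
            by_cases hic : i = c
            · subst hic
              rw [← hideg1]
              intro hcontra
              exact hzero (by simpa using hcontra)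
            · rw [List.count_append]
              have : ([c]).count i = 0 := List.count_eq_zero.2 (by simpa using hic)
              have := hwait i h0 h1 hi
              omega
        obtain ⟨nq', w', indeg', es', ee', heq, hMid'⟩ := ih (L ++ [c]) nq _ _ _ _ hG' hMid1
        refine ⟨nq', w', indeg', es', ee', heq, ?_⟩
        rwa [show (L ++ [c]) ++ R = L ++ c :: R from by simp] at hMid'

theorem pvA_loop_lem (n : Int) (E : List (Int × Int)) (t : List Int)
    (graph : PySem.Dict Int (List Int)) (hgr : ∀ p, graph.getD p [] = pvGrf E p)
    (hE : ∀ e ∈ E, 0 ≤ e.1 ∧ e.1 < n) :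
    ∀ (fuel : Nat) (P Q : List Int) (w : Int → Int) (indeg es ee : List Int),
    pvInvA n E t w P Q indeg es ee → n.toNat < fuel + P.length →
    (pvA_loop graph t fuel Q (indeg, es, ee)).length = n.toNat
    ∧ ∀ j, 0 ≤ j → j < n →
        pvOut n E t j (PySem.List.pyGetD (pvA_loop graph t fuel Q (indeg, es, ee)) j 0) := by
  intro fuel
  induction fuel with
  | zero =>
      intro P Q w indeg es ee hInv hfuel
      exfalso
      obtain ⟨-, -, -, hnd, hbnd, -⟩ := hInv
      have := pvKeysLe (P ++ Q) n hnd hbnd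
      rw [List.length_append] at this
      omega
  | succ fuel ih =>
      intro P Q w indeg es ee hInv hfuel
      obtain ⟨hl1, hl2, hl3, hnd, hbnd, hindeg, hes, hee, hex, hprq, hwait⟩ := hInv
      cases Q with
      | nil =>
          simp only [pvA_loop]
          refine ⟨hl3, fun j h0 h1 => ?_⟩
          by_cases hj : j ∈ P
          · rw [hee j h0 h1, if_pos (by simpa using hj)]
            exact Or.inl (hex j (by simpa using hj))
          · rw [hee j h0 h1, if_neg (by simpa using hj)]
            refine Or.inr ⟨?_, rfl⟩
            rintro ⟨k, hk⟩
            refine hj (pvD_closure (n := n) (E := E) (fun x => x ∈ P)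
              (fun i hi0 hi1 hpr => ?_) k j hk)
            by_contra hiP
            obtain ⟨p, hp, hpP⟩ := pvNdegNeZero E P i (hwait i hi0 hi1 (by simpa using hiP))
            exact hpP (hpr p hp)
      | cons pstar rest =>
          simp only [pvA_loop]
          rw [hgr pstar]
          have hMid0 : pvMid n E t w P pstar rest [] [] indeg es ee := by
            refine ⟨hl1, hl2, hl3, by simpa using hnd, by simpa using hbnd,
              fun i h0 h1 => by rw [hindeg i h0 h1]; simp,
              fun i h0 h1 => by rw [hes i h0 h1]; simp,
              fun i h0 h1 => by rw [hee i h0 h1]; simp,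
              by simpa using hex, ?_,
              fun i hi p hp => hprq i (by simp [hi]) p hp,
              by simp, by simp,
              fun i h0 h1 hi => by
                have := hwait i h0 h1 (by simpa using hi)
                simpa using this⟩
            intro i hi p hp
            refine hprq i ?_ p hp
            rcases List.mem_append.1 hi with h | h
            · exact List.mem_append_left _ h
            · rw [List.mem_singleton.1 h]
              simp
          obtain ⟨nq', w', indeg', es', ee', heq, hMid'⟩ :=
            pvA_inner n E t hE pstar P rest (pvGrf E pstar) [] [] w indeg es ee (by simp) hMid0
          simp only [List.nil_append] at hMid'
          rw [List.append_nil] at heq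
          rw [heq]
          obtain ⟨kl1, kl2, kl3, knd, kbnd, kindeg, kes, kee, kex, kprqP, kprqR, kprqN, -, kwait⟩ := hMid'
          have hpsP : pstar ∉ P := fun hm =>
            (List.nodup_append.1 knd).2.2 pstar hm pstar List.mem_cons_self rfl
          have hcountg : ∀ i, ((pvGrf E pstar).count i : Int) = ((pvPrq E i).count pstar : Int) := by
            intro i
            rw [pvCountGrf]
          have hInv' : pvInvA n E t w' (P ++ [pstar]) (rest ++ nq') indeg' es' ee' := by
            refine ⟨kl1, kl2, kl3, by simpa using knd, by simpa using kbnd,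
              fun i h0 h1 => ?_, fun i h0 h1 => ?_,
              fun i h0 h1 => by rw [kee i h0 h1]; simp, by simpa using kex, ?_,
              fun i h0 h1 hi => by
                rw [pvNdegPop E P pstar hpsP i, ← hcountg i]
                have := kwait i h0 h1 (by simpa using hi)
                omega⟩
            · rw [kindeg i h0 h1, pvNdegPop E P pstar hpsP i, ← hcountg i]
            · rw [kes i h0 h1, pvEsF_snoc]
              have hmm : (pstar ∈ pvPrq E i) ↔ (i ∈ pvGrf E pstar) := (pvMemGrf E pstar i).symm
              simp only [hmm]
            · intro i hi p hp
              rcases List.mem_append.1 hi with h | h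
              · rcases List.mem_append.1 h with h' | h'
                · exact List.mem_append_left _ (kprqP i (List.mem_append_left _ h') p hp)
                · exact List.mem_append_left _ (kprqP i (by simp [List.mem_singleton.1 h']) p hp)
              · rcases List.mem_append.1 h with h' | h'
                · exact List.mem_append_left _ (kprqR i h' p hp)
                · exact kprqN i h' p hp
          have := ih (P ++ [pstar]) (rest ++ nq') w' indeg' es' ee' hInv'
            (by rw [List.length_append]; simp; omega)
          exact this

theorem pvA_val (n : Int) (E : List (Int × Int)) (t : List Int)
    (graph : PySem.Dict Int (List Int)) (indeg ee0 : List Int)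
    (hgr : ∀ p, graph.getD p [] = pvGrf E p)
    (hEb : ∀ e ∈ E, 0 ≤ e.1 ∧ e.1 < n)
    (hidlen : indeg.length = n.toNat)
    (hid : ∀ i, 0 ≤ i → i < n → PySem.List.pyGetD indeg i 0 = pvNdeg E [] i)
    (helen : ee0.length = n.toNat)
    (hee0 : ∀ i, 0 ≤ i → i < n → PySem.List.pyGetD ee0 i 0
      = if i ∈ PySem.List.pyRange 0 n 1 ∧ (PySem.List.pyGetD indeg i 0 == 0) = true
        then PySem.List.pyGetD t i 0 else 0) :
    (pvA_loop graph t (n.toNat + 1)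
        ((PySem.List.pyRange 0 n 1).filter (fun i => PySem.List.pyGetD indeg i 0 == 0))
        (indeg, List.replicate n.toNat 0, ee0)).length = n.toNat
    ∧ ∀ j, 0 ≤ j → j < n → pvOut n E t j (PySem.List.pyGetD (pvA_loop graph t (n.toNat + 1)
        ((PySem.List.pyRange 0 n 1).filter (fun i => PySem.List.pyGetD indeg i 0 == 0))
        (indeg, List.replicate n.toNat 0, ee0)) j 0) := by
  have hprqnil : ∀ i, 0 ≤ i → i < n → (PySem.List.pyGetD indeg i 0 == 0) = true → pvPrq E i = [] := by
    intro i h0 h1 hc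
    rw [hid i h0 h1] at hc
    have hz : pvNdeg E [] i = 0 := by simpa using hc
    rw [pvNdegNil] at hz
    exact List.eq_nil_of_length_eq_zero (by omega)
  have hInv0 : pvInvA n E t (fun i => PySem.List.pyGetD t i 0) []
      ((PySem.List.pyRange 0 n 1).filter (fun i => PySem.List.pyGetD indeg i 0 == 0))
      indeg (List.replicate n.toNat 0) ee0 := by
    refine ⟨hidlen, List.length_replicate, helen, ?_, ?_,
      fun i h0 h1 => hid i h0 h1, ?_, ?_, ?_, ?_, ?_⟩
    · simpa using (PySem.List.nodup_pyRange_one 0 n).filter _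
    · intro x hx
      simp only [List.nil_append, List.mem_filter] at hx
      exact PySem.List.mem_pyRange_one.1 hx.1
    · intro i h0 h1
      rw [pvGetRepl n.toNat i h0 (by omega)]
      rfl
    · intro i h0 h1
      rw [hee0 i h0 h1]
      have hmm : (i ∈ PySem.List.pyRange 0 n 1 ∧ (PySem.List.pyGetD indeg i 0 == 0) = true)
          ↔ (i ∈ [] ++ (PySem.List.pyRange 0 n 1).filter (fun i => PySem.List.pyGetD indeg i 0 == 0)) := by
        simp [List.mem_filter]
      simp only [hmm]
    · intro i hi
      simp only [List.nil_append, List.mem_filter] at hi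
      have hb := PySem.List.mem_pyRange_one.1 hi.1
      have hnil := hprqnil i hb.1 hb.2 hi.2
      refine ⟨1, ?_, ?_⟩
      · rw [pvD_succ]
        simp [hnil, hb.1, hb.2]
      · rw [pvV_succ, hnil]
        simp
    · intro i hi p hp
      simp only [List.nil_append, List.mem_filter] at hi
      have hb := PySem.List.mem_pyRange_one.1 hi.1
      rw [hprqnil i hb.1 hb.2 hi.2] at hp
      cases hp
    · intro i h0 h1 hi
      simp only [List.nil_append, List.mem_filter] at hi
      rw [← hid i h0 h1]
      intro hz
      exact hi ⟨PySem.List.mem_pyRange_one.2 ⟨h0, h1⟩, by simpa using hz⟩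
  exact pvA_loop_lem n E t graph hgr hEb (n.toNat + 1) []
    ((PySem.List.pyRange 0 n 1).filter (fun i => PySem.List.pyGetD indeg i 0 == 0))
    (fun i => PySem.List.pyGetD t i 0) indeg (List.replicate n.toNat 0) ee0 hInv0 (by simp)

-- ===== VERDICT (by name: the statement is the Claim_ definition above) =====
theorem min_time_to_complete_courses_spec : Claim_equal_min_time_to_complete_courses := by
  unfold Claim_equal_min_time_to_complete_courses
  intro n prerequisites time _ hPre
  unfold Spec_min_time_to_complete_courses
  obtain ⟨hn, ht, hP⟩ := hPre
  have hEb := pvEdgesBounds n prerequisites hP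
  obtain ⟨hgr, hidlen, hid⟩ := pvA_build n prerequisites hP
  have hinit := pvA_initFold n (prerequisites.foldl
    (fun (st : PySem.Dict Int (List Int) × List Int) pair =>
      match pair with
      | course :: prereq :: _ =>
          (st.1.modify prereq [] (· ++ [course]),
           PySem.List.pySetD st.2 course (PySem.List.pyGetD st.2 course 0 + 1))
      | _ => st)
    (PySem.Dict.empty, List.replicate n.toNat 0)).2 time (PySem.List.pyRange 0 n 1)
    (List.replicate n.toNat 0) [] (by simp) (fun i hi => PySem.List.mem_pyRange_one.1 hi)
  have hee0 : ∀ i, 0 ≤ i → i < n → PySem.List.pyGetD ((PySem.List.pyRange 0 n 1).foldl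
    (fun (st : List Int × List Int) i =>
      if PySem.List.pyGetD (prerequisites.foldl
    (fun (st : PySem.Dict Int (List Int) × List Int) pair =>
      match pair with
      | course :: prereq :: _ =>
          (st.1.modify prereq [] (· ++ [course]),
           PySem.List.pySetD st.2 course (PySem.List.pyGetD st.2 course 0 + 1))
      | _ => st)
    (PySem.Dict.empty, List.replicate n.toNat 0)).2 i 0 == 0 then
        (st.1 ++ [i], PySem.List.pySetD st.2 i (PySem.List.pyGetD time i 0))
      else st) ([], List.replicate n.toNat 0)).2 i 0
      = if i ∈ PySem.List.pyRange 0 n 1 ∧ (PySem.List.pyGetD (prerequisites.foldl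
    (fun (st : PySem.Dict Int (List Int) × List Int) pair =>
      match pair with
      | course :: prereq :: _ =>
          (st.1.modify prereq [] (· ++ [course]),
           PySem.List.pySetD st.2 course (PySem.List.pyGetD st.2 course 0 + 1))
      | _ => st)
    (PySem.Dict.empty, List.replicate n.toNat 0)).2 i 0 == 0) = true
        then PySem.List.pyGetD time i 0 else 0 := by
    intro i h0 h1
    rw [hinit.2.2 i h0 h1]
    split_ifs with h
    · rfl
    · exact pvGetRepl n.toNat i h0 (by omega)
  have hA := pvA_val n (pvEdges prerequisites) time (prerequisites.foldl
    (fun (st : PySem.Dict Int (List Int) × List Int) pair =>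
      match pair with
      | course :: prereq :: _ =>
          (st.1.modify prereq [] (· ++ [course]),
           PySem.List.pySetD st.2 course (PySem.List.pyGetD st.2 course 0 + 1))
      | _ => st)
    (PySem.Dict.empty, List.replicate n.toNat 0)).1 (prerequisites.foldl
    (fun (st : PySem.Dict Int (List Int) × List Int) pair =>
      match pair with
      | course :: prereq :: _ =>
          (st.1.modify prereq [] (· ++ [course]),
           PySem.List.pySetD st.2 course (PySem.List.pyGetD st.2 course 0 + 1))
      | _ => st)
    (PySem.Dict.empty, List.replicate n.toNat 0)).2 ((PySem.List.pyRange 0 n 1).foldl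
    (fun (st : List Int × List Int) i =>
      if PySem.List.pyGetD (prerequisites.foldl
    (fun (st : PySem.Dict Int (List Int) × List Int) pair =>
      match pair with
      | course :: prereq :: _ =>
          (st.1.modify prereq [] (· ++ [course]),
           PySem.List.pySetD st.2 course (PySem.List.pyGetD st.2 course 0 + 1))
      | _ => st)
    (PySem.Dict.empty, List.replicate n.toNat 0)).2 i 0 == 0 then
        (st.1 ++ [i], PySem.List.pySetD st.2 i (PySem.List.pyGetD time i 0))
      else st) ([], List.replicate n.toNat 0)).2
    hgr hEb hidlen hid hinit.2.1 hee0
  have hB := pvB_out n (pvEdges prerequisites) time (prerequisites.foldl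
    (fun (d : PySem.Dict Int (List Int)) pair =>
      d.insert (pair.getD 0 0) (d.getD (pair.getD 0 0) [] ++ [pair.getD 1 0]))
    ((PySem.List.pyRange 0 n 1).foldl (fun (d : PySem.Dict Int (List Int)) i => d.insert i []) PySem.Dict.empty))
    (pvB_prereqs n prerequisites)
  show (PySem.List.max? (pvA_loop (prerequisites.foldl
    (fun (st : PySem.Dict Int (List Int) × List Int) pair =>
      match pair with
      | course :: prereq :: _ =>
          (st.1.modify prereq [] (· ++ [course]),
           PySem.List.pySetD st.2 course (PySem.List.pyGetD st.2 course 0 + 1))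
      | _ => st)
    (PySem.Dict.empty, List.replicate n.toNat 0)).1 time (n.toNat + 1) ((PySem.List.pyRange 0 n 1).foldl
    (fun (st : List Int × List Int) i =>
      if PySem.List.pyGetD (prerequisites.foldl
    (fun (st : PySem.Dict Int (List Int) × List Int) pair =>
      match pair with
      | course :: prereq :: _ =>
          (st.1.modify prereq [] (· ++ [course]),
           PySem.List.pySetD st.2 course (PySem.List.pyGetD st.2 course 0 + 1))
      | _ => st)
    (PySem.Dict.empty, List.replicate n.toNat 0)).2 i 0 == 0 then
        (st.1 ++ [i], PySem.List.pySetD st.2 i (PySem.List.pyGetD time i 0))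
      else st) ([], List.replicate n.toNat 0)).1 ((prerequisites.foldl
    (fun (st : PySem.Dict Int (List Int) × List Int) pair =>
      match pair with
      | course :: prereq :: _ =>
          (st.1.modify prereq [] (· ++ [course]),
           PySem.List.pySetD st.2 course (PySem.List.pyGetD st.2 course 0 + 1))
      | _ => st)
    (PySem.Dict.empty, List.replicate n.toNat 0)).2, List.replicate n.toNat 0, ((PySem.List.pyRange 0 n 1).foldl
    (fun (st : List Int × List Int) i =>
      if PySem.List.pyGetD (prerequisites.foldl
    (fun (st : PySem.Dict Int (List Int) × List Int) pair =>
      match pair with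
      | course :: prereq :: _ =>
          (st.1.modify prereq [] (· ++ [course]),
           PySem.List.pySetD st.2 course (PySem.List.pyGetD st.2 course 0 + 1))
      | _ => st)
    (PySem.Dict.empty, List.replicate n.toNat 0)).2 i 0 == 0 then
        (st.1 ++ [i], PySem.List.pySetD st.2 i (PySem.List.pyGetD time i 0))
      else st) ([], List.replicate n.toNat 0)).2)) (fun y => y)).getD 0
      = (PySem.List.max? ((PySem.List.pyRange 0 n 1).map (fun i => (pvB_loop n (prerequisites.foldl
    (fun (d : PySem.Dict Int (List Int)) pair =>
      d.insert (pair.getD 0 0) (d.getD (pair.getD 0 0) [] ++ [pair.getD 1 0]))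
    ((PySem.List.pyRange 0 n 1).foldl (fun (d : PySem.Dict Int (List Int)) i => d.insert i []) PySem.Dict.empty)) time (n.toNat + 2) PySem.Dict.empty).getD i 0)) (fun y => y)).getD 0
  rw [show ((PySem.List.pyRange 0 n 1).foldl
    (fun (st : List Int × List Int) i =>
      if PySem.List.pyGetD (prerequisites.foldl
    (fun (st : PySem.Dict Int (List Int) × List Int) pair =>
      match pair with
      | course :: prereq :: _ =>
          (st.1.modify prereq [] (· ++ [course]),
           PySem.List.pySetD st.2 course (PySem.List.pyGetD st.2 course 0 + 1))
      | _ => st)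
    (PySem.Dict.empty, List.replicate n.toNat 0)).2 i 0 == 0 then
        (st.1 ++ [i], PySem.List.pySetD st.2 i (PySem.List.pyGetD time i 0))
      else st) ([], List.replicate n.toNat 0)).1 = (PySem.List.pyRange 0 n 1).filter
      (fun i => PySem.List.pyGetD (prerequisites.foldl
    (fun (st : PySem.Dict Int (List Int) × List Int) pair =>
      match pair with
      | course :: prereq :: _ =>
          (st.1.modify prereq [] (· ++ [course]),
           PySem.List.pySetD st.2 course (PySem.List.pyGetD st.2 course 0 + 1))
      | _ => st)
    (PySem.Dict.empty, List.replicate n.toNat 0)).2 i 0 == 0) from by simpa using hinit.1]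
  have hlist : (pvA_loop (prerequisites.foldl
    (fun (st : PySem.Dict Int (List Int) × List Int) pair =>
      match pair with
      | course :: prereq :: _ =>
          (st.1.modify prereq [] (· ++ [course]),
           PySem.List.pySetD st.2 course (PySem.List.pyGetD st.2 course 0 + 1))
      | _ => st)
    (PySem.Dict.empty, List.replicate n.toNat 0)).1 time (n.toNat + 1)
      ((PySem.List.pyRange 0 n 1).filter (fun i => PySem.List.pyGetD (prerequisites.foldl
    (fun (st : PySem.Dict Int (List Int) × List Int) pair =>
      match pair with
      | course :: prereq :: _ =>
          (st.1.modify prereq [] (· ++ [course]),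
           PySem.List.pySetD st.2 course (PySem.List.pyGetD st.2 course 0 + 1))
      | _ => st)
    (PySem.Dict.empty, List.replicate n.toNat 0)).2 i 0 == 0))
      ((prerequisites.foldl
    (fun (st : PySem.Dict Int (List Int) × List Int) pair =>
      match pair with
      | course :: prereq :: _ =>
          (st.1.modify prereq [] (· ++ [course]),
           PySem.List.pySetD st.2 course (PySem.List.pyGetD st.2 course 0 + 1))
      | _ => st)
    (PySem.Dict.empty, List.replicate n.toNat 0)).2, List.replicate n.toNat 0, ((PySem.List.pyRange 0 n 1).foldl
    (fun (st : List Int × List Int) i =>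
      if PySem.List.pyGetD (prerequisites.foldl
    (fun (st : PySem.Dict Int (List Int) × List Int) pair =>
      match pair with
      | course :: prereq :: _ =>
          (st.1.modify prereq [] (· ++ [course]),
           PySem.List.pySetD st.2 course (PySem.List.pyGetD st.2 course 0 + 1))
      | _ => st)
    (PySem.Dict.empty, List.replicate n.toNat 0)).2 i 0 == 0 then
        (st.1 ++ [i], PySem.List.pySetD st.2 i (PySem.List.pyGetD time i 0))
      else st) ([], List.replicate n.toNat 0)).2)) = ((PySem.List.pyRange 0 n 1).map (fun i => (pvB_loop n (prerequisites.foldl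
    (fun (d : PySem.Dict Int (List Int)) pair =>
      d.insert (pair.getD 0 0) (d.getD (pair.getD 0 0) [] ++ [pair.getD 1 0]))
    ((PySem.List.pyRange 0 n 1).foldl (fun (d : PySem.Dict Int (List Int)) i => d.insert i []) PySem.Dict.empty)) time (n.toNat + 2) PySem.Dict.empty).getD i 0)) := by
    refine List.ext_getElem ?_ ?_
    · rw [hA.1, List.length_map, PySem.List.length_pyRange_one]
      omega
    · intro k hk1 hk2
      have hkN : k < n.toNat := by rw [hA.1] at hk1; exact hk1
      have hk0 : (0 : Int) ≤ (k : Int) := Int.natCast_nonneg k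
      have hkn : ((k : Int)) < n := by omega
      rw [List.getElem_map, PySem.List.getElem_pyRange_one]
      have hAe : PySem.List.pyGetD (pvA_loop (prerequisites.foldl
    (fun (st : PySem.Dict Int (List Int) × List Int) pair =>
      match pair with
      | course :: prereq :: _ =>
          (st.1.modify prereq [] (· ++ [course]),
           PySem.List.pySetD st.2 course (PySem.List.pyGetD st.2 course 0 + 1))
      | _ => st)
    (PySem.Dict.empty, List.replicate n.toNat 0)).1 time (n.toNat + 1)
        ((PySem.List.pyRange 0 n 1).filter (fun i => PySem.List.pyGetD (prerequisites.foldl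
    (fun (st : PySem.Dict Int (List Int) × List Int) pair =>
      match pair with
      | course :: prereq :: _ =>
          (st.1.modify prereq [] (· ++ [course]),
           PySem.List.pySetD st.2 course (PySem.List.pyGetD st.2 course 0 + 1))
      | _ => st)
    (PySem.Dict.empty, List.replicate n.toNat 0)).2 i 0 == 0))
        ((prerequisites.foldl
    (fun (st : PySem.Dict Int (List Int) × List Int) pair =>
      match pair with
      | course :: prereq :: _ =>
          (st.1.modify prereq [] (· ++ [course]),
           PySem.List.pySetD st.2 course (PySem.List.pyGetD st.2 course 0 + 1))
      | _ => st)
    (PySem.Dict.empty, List.replicate n.toNat 0)).2, List.replicate n.toNat 0, ((PySem.List.pyRange 0 n 1).foldl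
    (fun (st : List Int × List Int) i =>
      if PySem.List.pyGetD (prerequisites.foldl
    (fun (st : PySem.Dict Int (List Int) × List Int) pair =>
      match pair with
      | course :: prereq :: _ =>
          (st.1.modify prereq [] (· ++ [course]),
           PySem.List.pySetD st.2 course (PySem.List.pyGetD st.2 course 0 + 1))
      | _ => st)
    (PySem.Dict.empty, List.replicate n.toNat 0)).2 i 0 == 0 then
        (st.1 ++ [i], PySem.List.pySetD st.2 i (PySem.List.pyGetD time i 0))
      else st) ([], List.replicate n.toNat 0)).2)) ((k : Int)) 0
          = (pvA_loop (prerequisites.foldl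
    (fun (st : PySem.Dict Int (List Int) × List Int) pair =>
      match pair with
      | course :: prereq :: _ =>
          (st.1.modify prereq [] (· ++ [course]),
           PySem.List.pySetD st.2 course (PySem.List.pyGetD st.2 course 0 + 1))
      | _ => st)
    (PySem.Dict.empty, List.replicate n.toNat 0)).1 time (n.toNat + 1)
        ((PySem.List.pyRange 0 n 1).filter (fun i => PySem.List.pyGetD (prerequisites.foldl
    (fun (st : PySem.Dict Int (List Int) × List Int) pair =>
      match pair with
      | course :: prereq :: _ =>
          (st.1.modify prereq [] (· ++ [course]),
           PySem.List.pySetD st.2 course (PySem.List.pyGetD st.2 course 0 + 1))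
      | _ => st)
    (PySem.Dict.empty, List.replicate n.toNat 0)).2 i 0 == 0))
        ((prerequisites.foldl
    (fun (st : PySem.Dict Int (List Int) × List Int) pair =>
      match pair with
      | course :: prereq :: _ =>
          (st.1.modify prereq [] (· ++ [course]),
           PySem.List.pySetD st.2 course (PySem.List.pyGetD st.2 course 0 + 1))
      | _ => st)
    (PySem.Dict.empty, List.replicate n.toNat 0)).2, List.replicate n.toNat 0, ((PySem.List.pyRange 0 n 1).foldl
    (fun (st : List Int × List Int) i =>
      if PySem.List.pyGetD (prerequisites.foldl
    (fun (st : PySem.Dict Int (List Int) × List Int) pair =>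
      match pair with
      | course :: prereq :: _ =>
          (st.1.modify prereq [] (· ++ [course]),
           PySem.List.pySetD st.2 course (PySem.List.pyGetD st.2 course 0 + 1))
      | _ => st)
    (PySem.Dict.empty, List.replicate n.toNat 0)).2 i 0 == 0 then
        (st.1 ++ [i], PySem.List.pySetD st.2 i (PySem.List.pyGetD time i 0))
      else st) ([], List.replicate n.toNat 0)).2))[k] := by
        rw [PySem.List.pyGetD_natCast]
        exact List.getD_eq_getElem _ 0 hk1
      rw [← hAe, zero_add]
      exact pvOut_unique (hA.2 (k : Int) hk0 hkn) (hB (k : Int) hk0 hkn)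
  rw [hlist]
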